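-- pv_equiv track=rewrite | github.com/nbalance97/Programmers | LV 2/[1차] 프렌즈4블록.py | solution
-- ===== SOURCE A (Python) =====
-- def check(board, m, n):
--     dx = [0, 0, 1, 1]
--     dy = [0, 1, 0, 1]
--     ch = board[m][n]
--     count = 0
--     for i in range(4):
--         x = m + dx[i]
--         y = n + dy[i]
--         if x >= 0 and x <= len(board)-1 and y >= 0 and y <= len(board[0])-1:
--             if board[x][y] == ch:
--                 count += 1
--
--     if count == 4:
--         return True
--     return False
--
-- def remove(board, m, n):
--     dx = [0, 0, 1, 1]
--     dy = [0, 1, 0, 1]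
--     for i in range(4):
--         board[m+dx[i]][n+dy[i]] = '-'
--
-- def solution(m, n, board):
--     board = [list(b) for b in board]
--     answer = 0
--
--     while True:
--         currect = []
--         # 2x2 검사
--         for i in range(m):
--             for j in range(n):
--                 if board[i][j] == '-':
--                     continue
--                 if check(board, i, j):
--                     currect.append([i, j])
--
--         if len(currect) == 0:
--             # -의 개수 구해줌
--             for b in board:
--                 answer += b.count('-')
--             break
--
--         # 검사결과 제거
--         for cur in currect:
--             remove(board, cur[0], cur[1])
--
--         # - 붙여주는 과정
--         columns = [[] for _ in range(n)]
--         for j in range(n):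
--             for i in range(m):
--                 if board[i][j] != '-':
--                     columns[j].append(board[i][j])
--             if len(columns[j]) < m:
--                 columns[j] = ['-'] * (m - len(columns[j])) + columns[j] # 길이 '-' 붙여서 맞추어줌
--
--
--         # - 제거한걸 원래 board에 적용
--         for i in range(m):
--             for j in range(n):
--                 board[i][j] = columns[j][i]
--
--     return answer
-- ===== SOURCE B (Python) =====
-- def solution(m, n, board):
--     # '-' cells are already-cleared blocks: they count as removed
--     removed = sum(r.count('-') for r in board)
--     if m <= 0 or n <= 0:
--         return removed  # no grid, nothing can ever match
--     # live board as sentinel-free bottom-first column stacks (gravity is implicit)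
--     cols = [[board[i][j] for i in range(m - 1, -1, -1) if board[i][j] != '-']
--             for j in range(n)]
--     while True:
--         dead = [set() for _ in range(n)]
--         for j in range(n - 1):
--             a, b = cols[j], cols[j + 1]
--             for t in range(min(len(a), len(b)) - 1):
--                 if a[t] == a[t + 1] == b[t] == b[t + 1]:
--                     dead[j].update((t, t + 1))
--                     dead[j + 1].update((t, t + 1))
--         k = sum(len(d) for d in dead)
--         if k == 0:
--             return removed
--         removed += k
--         cols = [[c for t, c in enumerate(col) if t not in dead[j]]
--                 for j, col in enumerate(cols)]
-- ===== Notes on version B (the rewrite author's own statement) =====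
-- stated objective: alternative
-- what changed: B replaces A's '-'-sentinel grid with its mutate-remove, regravitate-with-'-'-padding and final '-'-count passes by sentinel-free bottom-first column stacks: matches are found by comparing adjacent stacks height-wise, removal deletes stack entries (gravity is implicit), and the answer is a removed-cell counter seeded with the board's pre-cleared '-' cells.
-- outside the precondition, e.g. on solution(3, 2, ['aa', '--', 'aa']): A returns 2, B returns 6; on solution(1, 1, ['aa', 'aa']): A returns 4, B returns 0; on solution(2, 2, ['aa']): A raises IndexError, B raises IndexError
import Mathlib
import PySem

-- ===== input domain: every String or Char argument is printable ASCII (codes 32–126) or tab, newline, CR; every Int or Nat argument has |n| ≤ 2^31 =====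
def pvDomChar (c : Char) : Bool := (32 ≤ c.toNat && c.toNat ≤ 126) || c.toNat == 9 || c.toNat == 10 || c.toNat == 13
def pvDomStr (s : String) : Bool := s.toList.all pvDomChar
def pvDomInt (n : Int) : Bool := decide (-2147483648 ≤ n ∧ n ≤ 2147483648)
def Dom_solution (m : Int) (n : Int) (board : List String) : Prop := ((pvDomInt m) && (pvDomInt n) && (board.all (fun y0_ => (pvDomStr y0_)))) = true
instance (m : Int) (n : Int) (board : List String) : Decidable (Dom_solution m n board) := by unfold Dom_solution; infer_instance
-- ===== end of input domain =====

-- B replaces A's '-'-sentinel grid (mark matched 2x2 blocks, regravitate columns with '-' padding,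
-- finally count '-') by sentinel-free bottom-first column stacks: matches are found by comparing
-- adjacent stacks height-wise, removal deletes stack entries (gravity is implicit) and the answer
-- is a removed-cell counter seeded with the board's pre-cleared '-' cells
-- (objective: alternative). Equivalence proved on Pre_solution.

-- ===== PORT A =====
-- 2-D read board[i][j] (A only reads in-range cells under Pre_; the default is irrelevant there)
def pvCell (g : List (List Char)) (i j : Nat) : Char := (g.getD i []).getD j ' '
-- board[i][j] = c  (in range under Pre_)
def pvSet2 (g : List (List Char)) (i j : Nat) (c : Char) : List (List Char) :=
  g.set i ((g.getD i []).set j c)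

-- port of `check`
def pvCheck (g : List (List Char)) (i j : Nat) : Bool :=
  let ch := pvCell g i j
  let cnt := [((0:Nat),(0:Nat)), (0,1), (1,0), (1,1)].foldl
    (fun c d =>
      let x := i + d.1
      let y := j + d.2
      if x + 1 ≤ g.length ∧ y + 1 ≤ (g.headD []).length then
        (if pvCell g x y == ch then c + 1 else c)
      else c) 0
  cnt == 4

-- port of `remove`
def pvRemove (g : List (List Char)) (i j : Nat) : List (List Char) :=
  pvSet2 (pvSet2 (pvSet2 (pvSet2 g i j '-') i (j+1) '-') (i+1) j '-') (i+1) (j+1) '-'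

-- A's `while True` loop; the fuel argument only makes it total (one unit per round, enough under Pre_)
def pvLoopA (m n : Int) : Nat → List (List Char) → Int
  | 0, _ => 0
  | f+1, g =>
    let currect := (PySem.List.pyRange 0 m 1).flatMap (fun i =>
      (PySem.List.pyRange 0 n 1).filterMap (fun j =>
        if pvCell g i.toNat j.toNat == '-' then none
        else if pvCheck g i.toNat j.toNat then some (i, j) else none))
    if currect.length == 0 then
      g.foldl (fun a row => a + (row.count '-' : Int)) 0
    else
      let g1 := currect.foldl (fun h c => pvRemove h c.1.toNat c.2.toNat) g
      let columns := (PySem.List.pyRange 0 n 1).map (fun j =>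
        let c := (PySem.List.pyRange 0 m 1).filterMap (fun i =>
          let ch := pvCell g1 i.toNat j.toNat
          if ch ≠ '-' then some ch else none)
        if (c.length : Int) < m then List.replicate (m - (c.length : Int)).toNat '-' ++ c else c)
      let g2 := (PySem.List.pyRange 0 m 1).foldl (fun h i =>
        (PySem.List.pyRange 0 n 1).foldl (fun h2 j =>
          pvSet2 h2 i.toNat j.toNat ((columns.getD j.toNat []).getD i.toNat ' ')) h) g1
      pvLoopA m n f g2

def solution (m : Int) (n : Int) (board : List String) : Int :=
  let g := board.map (fun b => b.toList)
  pvLoopA m n ((g.map List.length).sum + 1) g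

-- ===== PORT B =====
-- the per-round `dead` list of sets (Source B's double loop over adjacent column pairs);
-- the inner `range(min(len(a),len(b)) - 1)` is over non-negative ints, ported as List.range
def pvDead (n : Int) (cols : List (List Char)) : List (PySem.Set Nat) :=
  (PySem.List.pyRange 0 (n-1) 1).foldl (fun dead j =>
    let a := cols.getD j.toNat []
    let b := cols.getD (j.toNat + 1) []
    (List.range (min a.length b.length - 1)).foldl (fun dead t =>
      if a.getD t ' ' == a.getD (t+1) ' ' && a.getD (t+1) ' ' == b.getD t ' ' &&
         b.getD t ' ' == b.getD (t+1) ' '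
      then
        let d1 := dead.set j.toNat
          (PySem.Set.add (PySem.Set.add (dead.getD j.toNat PySem.Set.empty) t) (t+1))
        d1.set (j.toNat + 1)
          (PySem.Set.add (PySem.Set.add (d1.getD (j.toNat + 1) PySem.Set.empty) t) (t+1))
      else dead) dead)
    ((PySem.List.pyRange 0 n 1).map (fun _ => PySem.Set.empty))

-- B's `while True` loop with its `removed` accumulator; fuel only makes it total
def pvLoopN (n : Int) : Nat → List (List Char) → Int → Int
  | 0, _, _ => 0
  | f+1, cols, removed =>
    let dead := pvDead n cols
    let k : Int := (dead.map (fun d => (d.length : Int))).sum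
    if k == 0 then removed
    else pvLoopN n f
      ((PySem.List.enumerate cols).map (fun jc =>
        (PySem.List.enumerate jc.2).filterMap (fun tc =>
          if (dead.getD jc.1.toNat PySem.Set.empty).contains tc.1.toNat then none
          else some tc.2)))
      (removed + k)

def solution_alt (m : Int) (n : Int) (board : List String) : Int :=
  let removed : Int := (board.map (fun r => (r.toList.count '-' : Int))).sum
  if m ≤ 0 ∨ n ≤ 0 then removed
  else
    let cols := (PySem.List.pyRange 0 n 1).map (fun j =>
      (PySem.List.pyRange (m-1) (-1) (-1)).filterMap (fun i =>
        if ((board.getD i.toNat "").toList).getD j.toNat ' ' ≠ '-' then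
          some (((board.getD i.toNat "").toList).getD j.toNat ' ') else none))
    pvLoopN n ((board.map (fun s => s.toList.length)).sum + 1) cols removed

-- ===== PRECONDITION & SPEC =====
-- Pre_ excludes, for m,n > 0, (a) boards whose shape disagrees with m,n: there A usually raises
-- IndexError, and where it happens to return, its value mixes the m,n-bounded loops with
-- len(board)-bounded bounds checks and counts rows outside the m×n grid — an accident of A's
-- implementation; and (b) rectangular boards with a '-' cell strictly below a real cell in some
-- column: '-' collides with A's empty-cell sentinel, and only when every input '-' already sits
-- on top of its column does A's "already cleared" reading of it (which B shares) make sense.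
def Pre_solution (m : Int) (n : Int) (board : List String) : Prop :=
  m ≤ 0 ∨ n ≤ 0 ∨
    ((board.length : Int) = m ∧ (∀ s ∈ board, (s.toList.length : Int) = n) ∧
     ∀ i' < board.length, ∀ i < i', ∀ j < ((board.getD i' "").toList).length,
       ((board.getD i' "").toList).getD j ' ' = '-' →
       ((board.getD i "").toList).getD j ' ' = '-')
instance (m : Int) (n : Int) (board : List String) : Decidable (Pre_solution m n board) := by
  unfold Pre_solution; infer_instance

def pvWitness_solution : Int × Int × List String := (2, 3, ["aab", "aac"])

def Spec_solution (m : Int) (n : Int) (board : List String) (out : Int) : Prop := out = solution_alt m n board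
instance (m : Int) (n : Int) (board : List String) (out : Int) : Decidable (Spec_solution m n board out) := by unfold Spec_solution; infer_instance

-- ===== CLAIM (what is proved, stated in full; the proofs are below) =====
def Claim_equal_solution : Prop := ∀ (m : Int) (n : Int) (board : List String), Dom_solution m n board → Pre_solution m n board → Spec_solution m n board (solution m n board)

-- ===== LEMMAS AND PROOFS =====


-- Old grid-level development: pvLoopG is an intermediate corner-scan/doomed-set grid loop
-- (proof-side only); loops_eq proves pvLoopA = pvLoopG, and the stack layer below proves
-- pvLoopG = pvLoopN on sorted grids.

def pvScanA (m n : Int) (g : List (List Char)) : List (Int × Int) :=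
  (PySem.List.pyRange 0 m 1).flatMap (fun i =>
    (PySem.List.pyRange 0 n 1).filterMap (fun j =>
      if pvCell g i.toNat j.toNat == '-' then none
      else if pvCheck g i.toNat j.toNat then some (i, j) else none))

def pvGridA (m n : Int) (g : List (List Char)) (cs : List (Int × Int)) : List (List Char) :=
  let g1 := cs.foldl (fun h c => pvRemove h c.1.toNat c.2.toNat) g
  let columns := (PySem.List.pyRange 0 n 1).map (fun j =>
    let c := (PySem.List.pyRange 0 m 1).filterMap (fun i =>
      let ch := pvCell g1 i.toNat j.toNat
      if ch ≠ '-' then some ch else none)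
    if (c.length : Int) < m then List.replicate (m - (c.length : Int)).toNat '-' ++ c else c)
  (PySem.List.pyRange 0 m 1).foldl (fun h i =>
    (PySem.List.pyRange 0 n 1).foldl (fun h2 j =>
      pvSet2 h2 i.toNat j.toNat ((columns.getD j.toNat []).getD i.toNat ' ')) h) g1

theorem pvLoopA_succ (m n : Int) (f : Nat) (g : List (List Char)) :
    pvLoopA m n (f+1) g =
      if (pvScanA m n g).length == 0 then g.foldl (fun a row => a + (row.count '-' : Int)) 0
      else pvLoopA m n f (pvGridA m n g (pvScanA m n g)) := rfl

def pvScanB (m n : Int) (g : List (List Char)) : List (Int × Int) :=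
  (PySem.List.pyRange 0 (m-1) 1).flatMap (fun i =>
    (PySem.List.pyRange 0 (n-1) 1).filterMap (fun j =>
      let a := pvCell g i.toNat j.toNat
      if a ≠ '-' ∧ a = pvCell g i.toNat (j.toNat+1) ∧
         a = pvCell g (i.toNat+1) j.toNat ∧ a = pvCell g (i.toNat+1) (j.toNat+1)
      then some (i, j) else none))

def pvGridB (m n : Int) (g : List (List Char)) (hits : List (Int × Int)) : List (List Char) :=
  let doomed : PySem.Set (Int × Int) := PySem.Set.ofList (hits.flatMap (fun c =>
    [(c.1, c.2), (c.1, c.2 + 1), (c.1 + 1, c.2), (c.1 + 1, c.2 + 1)]))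
  let cols := (PySem.List.pyRange 0 n 1).map (fun j =>
    let keep := (PySem.List.pyRange 0 m 1).filterMap (fun i =>
      let ch := pvCell g i.toNat j.toNat
      if ¬ doomed.contains (i, j) ∧ ch ≠ '-' then some ch else none)
    List.replicate ((m - (keep.length : Int)).toNat) '-' ++ keep)
  (PySem.List.pyRange 0 m 1).map (fun i =>
    (PySem.List.pyRange 0 n 1).map (fun j => (cols.getD j.toNat []).getD i.toNat ' '))

def pvLoopG (m n : Int) : Nat → List (List Char) → Int
  | 0, _ => 0
  | f+1, g =>
    if (pvScanB m n g).isEmpty then (g.map (fun row => (row.count '-' : Int))).sum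
    else pvLoopG m n f (pvGridB m n g (pvScanB m n g))

theorem pvLoopG_succ (m n : Int) (f : Nat) (g : List (List Char)) :
    pvLoopG m n (f+1) g =
      if (pvScanB m n g).isEmpty then (g.map (fun row => (row.count '-' : Int))).sum
      else pvLoopG m n f (pvGridB m n g (pvScanB m n g)) := rfl

-- basic 2-D update lemmas
theorem getD_set_gen {α : Type} (g : List α) (i x : Nat) (r d : α) :
    (g.set i r).getD x d = if x = i ∧ i < g.length then r else g.getD x d := by
  simp only [List.getD_eq_getElem?_getD, List.getElem?_set]
  by_cases hx : i = x
  · subst hx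
    by_cases hl : i < g.length
    · simp [hl]
    · have : g[i]? = none := List.getElem?_eq_none (by omega)
      simp [hl, this]
  · have hx' : ¬ x = i := fun h => hx h.symm
    simp only [if_neg hx, if_neg (by tauto : ¬(x = i ∧ i < g.length))]

theorem cell_pvSet2 (g : List (List Char)) (i j x y : Nat) (c : Char) :
    pvCell (pvSet2 g i j c) x y =
      if x = i ∧ y = j ∧ i < g.length ∧ j < (g.getD i []).length then c
      else pvCell g x y := by
  unfold pvCell pvSet2
  rw [getD_set_gen]
  by_cases hx : x = i ∧ i < g.length
  · obtain ⟨rfl, hl⟩ := hx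
    rw [if_pos ⟨rfl, hl⟩, getD_set_gen]
    by_cases hy : y = j ∧ j < (g.getD x []).length
    · obtain ⟨rfl, hj⟩ := hy
      rw [if_pos ⟨rfl, hj⟩, if_pos ⟨rfl, rfl, hl, hj⟩]
    · rw [if_neg hy, if_neg (by tauto)]
  · rw [if_neg hx, if_neg (by tauto)]

theorem length_pvSet2 (g : List (List Char)) (i j : Nat) (c : Char) :
    (pvSet2 g i j c).length = g.length := by simp [pvSet2]

theorem rows_pvSet2 {g : List (List Char)} {N : Nat} (h : ∀ r ∈ g, r.length = N)
    (i j : Nat) (c : Char) : ∀ r ∈ pvSet2 g i j c, r.length = N := by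
  intro r hr
  rcases List.mem_or_eq_of_mem_set hr with h1 | h1
  · exact h r h1
  · subst h1
    simp only [List.length_set]
    by_cases hi : i < g.length
    · exact h _ (by rw [List.getD_eq_getElem?_getD, List.getElem?_eq_getElem hi]; exact List.getElem_mem hi)
    · have hset : pvSet2 g i j c = g := by
        unfold pvSet2
        exact List.set_eq_of_length_le (Nat.le_of_not_lt hi)
      rw [hset] at hr
      simpa using h _ hr

theorem getD_row_len {g : List (List Char)} {N : Nat} (hr : ∀ r ∈ g, r.length = N)
    {i : Nat} (hi : i < g.length) : (g.getD i []).length = N := by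
  rw [List.getD_eq_getElem?_getD, List.getElem?_eq_getElem hi]
  exact hr _ (List.getElem_mem hi)

theorem check_iff {M N : Nat} {g : List (List Char)} (hg : g.length = M)
    (hr : ∀ r ∈ g, r.length = N) (hM : 1 ≤ M) {i j : Nat} (hi : i < M) (hj : j < N) :
    pvCheck g i j = true ↔
      i + 1 < M ∧ j + 1 < N ∧ pvCell g i (j+1) = pvCell g i j ∧
      pvCell g (i+1) j = pvCell g i j ∧ pvCell g (i+1) (j+1) = pvCell g i j := by
  have hh : (g.headD []).length = N := by
    cases g with
    | nil => simp at hg; omega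
    | cons a t => exact hr a (by simp)
  unfold pvCheck
  simp only [List.foldl, hg, hh, Nat.add_zero]
  have A1 : i + 1 ≤ M := hi
  have B1 : j + 1 ≤ N := hj
  have h2' : (i + 1 < M) ↔ (i + 1 + 1 ≤ M) := by omega
  have h3' : (j + 1 < N) ↔ (j + 1 + 1 ≤ N) := by omega
  by_cases h2 : i + 1 + 1 ≤ M <;> by_cases h3 : j + 1 + 1 ≤ N <;>
    simp only [A1, B1, h2, h3, h2', h3', beq_iff_eq, and_true, true_and, and_false, false_and,
      if_false, iff_false, if_pos]
  · by_cases e3 : pvCell g (i+1) (j+1) = pvCell g i j <;>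
      by_cases e2 : pvCell g (i+1) j = pvCell g i j <;>
      by_cases e1 : pvCell g i (j+1) = pvCell g i j <;>
      simp [e1, e2, e3]
  · split_ifs <;> omega
  · split_ifs <;> omega
  · omega

theorem pyRange_zero_split {b : Int} (hb : 1 ≤ b) :
    PySem.List.pyRange 0 b 1 = PySem.List.pyRange 0 (b-1) 1 ++ [b-1] := by
  rw [PySem.List.pyRange_one_append 0 (b-1) b (by omega) (by omega)]
  congr 1
  have hb1 : b = (b-1) + 1 := by omega
  rw [hb1]
  simpa using PySem.List.pyRange_one_singleton (b-1)

-- the two scans find the same corners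
theorem scan_eq {m n : Int} (hm : 1 ≤ m) (hn : 1 ≤ n) {g : List (List Char)}
    (hg : g.length = m.toNat) (hr : ∀ r ∈ g, r.length = n.toNat) :
    pvScanA m n g = pvScanB m n g := by
  have hM : 1 ≤ m.toNat := by omega
  unfold pvScanA pvScanB
  rw [pyRange_zero_split hm, List.flatMap_append]
  have hlast : (PySem.List.pyRange 0 n 1).filterMap (fun j =>
      if pvCell g (m-1).toNat j.toNat == '-' then none
      else if pvCheck g (m-1).toNat j.toNat then some ((m-1 : Int), j) else none) = [] := by
    rw [List.filterMap_eq_nil_iff]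
    intro j hj
    rw [PySem.List.mem_pyRange_one] at hj
    by_cases hc : (pvCell g (m-1).toNat j.toNat == '-') = true
    · rw [if_pos hc]
    · have hchk : ¬ (pvCheck g (m-1).toNat j.toNat = true) := by
        intro hh
        rw [check_iff hg hr hM (by omega) (by omega)] at hh
        exact absurd hh.1 (by omega)
      rw [if_neg hc, if_neg hchk]
  rw [show ([m-1] : List Int).flatMap (fun i => (PySem.List.pyRange 0 n 1).filterMap (fun j =>
      if pvCell g i.toNat j.toNat == '-' then none
      else if pvCheck g i.toNat j.toNat then some (i, j) else none)) = [] from by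
    simp only [List.flatMap_cons, List.flatMap_nil, List.append_nil]; exact hlast]
  rw [List.append_nil]
  rw [List.flatMap_def, List.flatMap_def]
  congr 1
  apply List.map_congr_left
  intro i hi
  rw [PySem.List.mem_pyRange_one] at hi
  rw [pyRange_zero_split hn, List.filterMap_append]
  have hlastj : (if pvCell g i.toNat (n-1).toNat == '-' then none
      else if pvCheck g i.toNat (n-1).toNat then some (i, (n-1 : Int)) else none) = (none : Option (Int × Int)) := by
    by_cases hc : (pvCell g i.toNat (n-1).toNat == '-') = true
    · rw [if_pos hc]
    · have hchk : ¬ (pvCheck g i.toNat (n-1).toNat = true) := by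
        intro hh
        rw [check_iff hg hr hM (by omega) (by omega)] at hh
        exact absurd hh.2.1 (by omega)
      rw [if_neg hc, if_neg hchk]
  rw [show (([n-1] : List Int).filterMap (fun j =>
      if pvCell g i.toNat j.toNat == '-' then none
      else if pvCheck g i.toNat j.toNat then some (i, j) else none)) = [] from by
    simp only [List.filterMap_cons, hlastj, List.filterMap_nil]]
  rw [List.append_nil]
  apply List.filterMap_congr
  intro j hj
  rw [PySem.List.mem_pyRange_one] at hj
  dsimp only
  have hx : i.toNat < m.toNat := by omega
  have hy : j.toNat < n.toNat := by omega
  have hx1 : i.toNat + 1 < m.toNat := by omega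
  have hy1 : j.toNat + 1 < n.toNat := by omega
  by_cases hc : pvCell g i.toNat j.toNat = '-'
  · simp [hc]
  · have hcb : (pvCell g i.toNat j.toNat == '-') = false := by simp [hc]
    rw [hcb]
    simp only [Bool.false_eq_true, if_false]
    have hiff : (pvCheck g i.toNat j.toNat = true) ↔
        (pvCell g i.toNat j.toNat ≠ '-' ∧
         pvCell g i.toNat j.toNat = pvCell g i.toNat (j.toNat+1) ∧
         pvCell g i.toNat j.toNat = pvCell g (i.toNat+1) j.toNat ∧
         pvCell g i.toNat j.toNat = pvCell g (i.toNat+1) (j.toNat+1)) := by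
      rw [check_iff hg hr hM hx hy]
      constructor
      · rintro ⟨-, -, e1, e2, e3⟩
        exact ⟨hc, e1.symm, e2.symm, e3.symm⟩
      · rintro ⟨-, e1, e2, e3⟩
        exact ⟨hx1, hy1, e1.symm, e2.symm, e3.symm⟩
    exact if_congr hiff rfl rfl

theorem mem_scanB {m n : Int} {g : List (List Char)} {c : Int × Int}
    (h : c ∈ pvScanB m n g) : 0 ≤ c.1 ∧ c.1 < m - 1 ∧ 0 ≤ c.2 ∧ c.2 < n - 1 := by
  unfold pvScanB at h
  simp only [List.mem_flatMap, List.mem_filterMap] at h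
  obtain ⟨i, hi, j, hj, hf⟩ := h
  rw [PySem.List.mem_pyRange_one] at hi
  rw [PySem.List.mem_pyRange_one] at hj
  split at hf
  · injection hf with h'
    subst h'
    exact ⟨by omega, by omega, by omega, by omega⟩
  · exact absurd hf (by simp)


-- the sequential removes realise the union of the doomed cells
theorem length_pvRemove (g : List (List Char)) (a b : Nat) :
    (pvRemove g a b).length = g.length := by
  simp [pvRemove, length_pvSet2]

theorem rows_pvRemove {g : List (List Char)} {N : Nat} (h : ∀ r ∈ g, r.length = N)
    (a b : Nat) : ∀ r ∈ pvRemove g a b, r.length = N := by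
  unfold pvRemove
  exact rows_pvSet2 (rows_pvSet2 (rows_pvSet2 (rows_pvSet2 h _ _ _) _ _ _) _ _ _) _ _ _

theorem cell_pvRemove {M N : Nat} {g : List (List Char)} (hg : g.length = M)
    (hr : ∀ r ∈ g, r.length = N) {a b : Nat} (ha : a + 1 < M) (hb : b + 1 < N) (x y : Nat) :
    pvCell (pvRemove g a b) x y =
      if (x = a ∨ x = a + 1) ∧ (y = b ∨ y = b + 1) then '-' else pvCell g x y := by
  have hr1 : ∀ r ∈ pvSet2 g a b '-', r.length = N := rows_pvSet2 hr a b '-'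
  have hr2 : ∀ r ∈ pvSet2 (pvSet2 g a b '-') a (b+1) '-', r.length = N := rows_pvSet2 hr1 a (b+1) '-'
  have hr3 : ∀ r ∈ pvSet2 (pvSet2 (pvSet2 g a b '-') a (b+1) '-') (a+1) b '-', r.length = N :=
    rows_pvSet2 hr2 (a+1) b '-'
  have F1 : (pvSet2 g a b '-').length = M := by rw [length_pvSet2, hg]
  have F2 : (pvSet2 (pvSet2 g a b '-') a (b+1) '-').length = M := by rw [length_pvSet2, F1]
  have F3 : (pvSet2 (pvSet2 (pvSet2 g a b '-') a (b+1) '-') (a+1) b '-').length = M := by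
    rw [length_pvSet2, F2]
  have row0 : (g.getD a []).length = N := getD_row_len hr (by omega)
  have row1 : ((pvSet2 g a b '-').getD a []).length = N := getD_row_len hr1 (by omega)
  have row2 : ((pvSet2 (pvSet2 g a b '-') a (b+1) '-').getD (a+1) []).length = N :=
    getD_row_len hr2 (by omega)
  have row3 : ((pvSet2 (pvSet2 (pvSet2 g a b '-') a (b+1) '-') (a+1) b '-').getD (a+1) []).length = N :=
    getD_row_len hr3 (by omega)
  have ta : a < M := by omega
  have tb : b < N := by omega
  unfold pvRemove
  rw [cell_pvSet2, cell_pvSet2, cell_pvSet2, cell_pvSet2]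
  simp only [F3, row3, F2, row2, F1, row1, hg, row0, ha, hb, ta, tb, and_true]
  split_ifs <;> tauto

theorem fold_remove_spec {M N : Nat} :
    ∀ (cs : List (Int × Int)) (g : List (List Char)),
      g.length = M → (∀ r ∈ g, r.length = N) →
      (∀ c ∈ cs, c.1.toNat + 1 < M ∧ c.2.toNat + 1 < N) →
      (cs.foldl (fun h c => pvRemove h c.1.toNat c.2.toNat) g).length = M ∧
      (∀ r ∈ cs.foldl (fun h c => pvRemove h c.1.toNat c.2.toNat) g, r.length = N) ∧
      ∀ x y : Nat, x < M → y < N →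
        pvCell (cs.foldl (fun h c => pvRemove h c.1.toNat c.2.toNat) g) x y =
          if (∃ c ∈ cs, (x = c.1.toNat ∨ x = c.1.toNat + 1) ∧ (y = c.2.toNat ∨ y = c.2.toNat + 1))
          then '-' else pvCell g x y := by
  intro cs
  induction cs with
  | nil => intro g hg hr _; simpa using ⟨hg, hr⟩
  | cons c cs ih =>
    intro g hg hr hb
    obtain ⟨hb1, hb2⟩ := hb c (List.mem_cons_self)
    have hg1 : (pvRemove g c.1.toNat c.2.toNat).length = M := by rw [length_pvRemove, hg]
    have hr1 : ∀ r ∈ pvRemove g c.1.toNat c.2.toNat, r.length = N := rows_pvRemove hr _ _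
    obtain ⟨ihl, ihrr, ihc⟩ := ih (pvRemove g c.1.toNat c.2.toNat) hg1 hr1
      (fun c' hc' => hb c' (List.mem_cons_of_mem _ hc'))
    refine ⟨by simpa using ihl, by simpa using ihrr, ?_⟩
    intro x y hx hy
    rw [List.foldl_cons, ihc x y hx hy, cell_pvRemove hg hr hb1 hb2]
    have hsplit : (∃ c' ∈ c :: cs, (x = c'.1.toNat ∨ x = c'.1.toNat + 1) ∧ (y = c'.2.toNat ∨ y = c'.2.toNat + 1)) ↔
        ((x = c.1.toNat ∨ x = c.1.toNat + 1) ∧ (y = c.2.toNat ∨ y = c.2.toNat + 1)) ∨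
        (∃ c' ∈ cs, (x = c'.1.toNat ∨ x = c'.1.toNat + 1) ∧ (y = c'.2.toNat ∨ y = c'.2.toNat + 1)) := by
      simp [List.mem_cons, or_and_right, exists_or]
    by_cases h1 : ∃ c' ∈ cs, (x = c'.1.toNat ∨ x = c'.1.toNat + 1) ∧ (y = c'.2.toNat ∨ y = c'.2.toNat + 1)
    · rw [if_pos h1, if_pos (hsplit.mpr (Or.inr h1))]
    · rw [if_neg h1]
      by_cases h2 : (x = c.1.toNat ∨ x = c.1.toNat + 1) ∧ (y = c.2.toNat ∨ y = c.2.toNat + 1)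
      · rw [if_pos h2, if_pos (hsplit.mpr (Or.inl h2))]
      · rw [if_neg h2, if_neg (fun hh => ((hsplit.mp hh).elim h2 h1))]

-- generic range-indexed overwrite
theorem fold_set_range {α : Type} (v : Nat → α) :
    ∀ (K : Nat) (r : List α), K ≤ r.length →
      (List.range K).foldl (fun r k => r.set k (v k)) r = (List.range K).map v ++ r.drop K := by
  intro K
  induction K with
  | zero => intro r _; simp
  | succ K ih =>
    intro r hK
    rw [List.range_succ, List.foldl_append, ih r (by omega)]
    simp only [List.foldl_cons, List.foldl_nil, List.map_append, List.map_cons, List.map_nil]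
    have hlen : ((List.range K).map v).length = K := by simp
    rw [List.set_append_right _ _ (by omega), hlen, Nat.sub_self,
      List.drop_eq_getElem_cons (show K < r.length by omega), List.set_cons_zero]
    simp
theorem fold_pvSet2_row (i : Nat) (vs : Nat → Char) :
    ∀ (js : List Nat) (h : List (List Char)),
      js.foldl (fun h2 k => pvSet2 h2 i k (vs k)) h =
        h.set i (js.foldl (fun r k => r.set k (vs k)) (h.getD i [])) := by
  intro js
  induction js with
  | nil =>
    intro h
    simp only [List.foldl_nil]
    by_cases hi : i < h.length
    · rw [List.getD_eq_getElem?_getD, List.getElem?_eq_getElem hi]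
      simp
    · rw [List.set_eq_of_length_le (by omega)]
  | cons k js ih =>
    intro h
    simp only [List.foldl_cons]
    rw [ih]
    show (pvSet2 h i k (vs k)).set i _ = _
    unfold pvSet2
    rw [getD_set_gen]
    by_cases hi : i < h.length
    · rw [if_pos ⟨rfl, hi⟩, List.set_set]
    · rw [if_neg (by tauto)]
      have e1 : h.set i ((h.getD i []).set k (vs k)) = h := List.set_eq_of_length_le (by omega)
      rw [e1, List.set_eq_of_length_le (by omega), List.set_eq_of_length_le (by omega)]

-- the two gravity passes produce the same next grid
def pvG1 (g : List (List Char)) (cs : List (Int × Int)) : List (List Char) :=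
  cs.foldl (fun h c => pvRemove h c.1.toNat c.2.toNat) g

def pvColsA (m n : Int) (g1 : List (List Char)) : List (List Char) :=
  (PySem.List.pyRange 0 n 1).map (fun j =>
    let c := (PySem.List.pyRange 0 m 1).filterMap (fun i =>
      let ch := pvCell g1 i.toNat j.toNat
      if ch ≠ '-' then some ch else none)
    if (c.length : Int) < m then List.replicate (m - (c.length : Int)).toNat '-' ++ c else c)

def pvColsB (m n : Int) (g : List (List Char)) (hits : List (Int × Int)) : List (List Char) :=
  let doomed : PySem.Set (Int × Int) := PySem.Set.ofList (hits.flatMap (fun c =>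
    [(c.1, c.2), (c.1, c.2 + 1), (c.1 + 1, c.2), (c.1 + 1, c.2 + 1)]))
  (PySem.List.pyRange 0 n 1).map (fun j =>
    let keep := (PySem.List.pyRange 0 m 1).filterMap (fun i =>
      let ch := pvCell g i.toNat j.toNat
      if ¬ doomed.contains (i, j) ∧ ch ≠ '-' then some ch else none)
    List.replicate ((m - (keep.length : Int)).toNat) '-' ++ keep)

theorem gridA_decomp (m n : Int) (g : List (List Char)) (cs : List (Int × Int)) :
    pvGridA m n g cs =
      (PySem.List.pyRange 0 m 1).foldl (fun h i =>
        (PySem.List.pyRange 0 n 1).foldl (fun h2 j =>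
          pvSet2 h2 i.toNat j.toNat (((pvColsA m n (pvG1 g cs)).getD j.toNat []).getD i.toNat ' ')) h)
        (pvG1 g cs) := rfl

theorem gridB_decomp (m n : Int) (g : List (List Char)) (hits : List (Int × Int)) :
    pvGridB m n g hits =
      (PySem.List.pyRange 0 m 1).map (fun i =>
        (PySem.List.pyRange 0 n 1).map (fun j =>
          ((pvColsB m n g hits).getD j.toNat []).getD i.toNat ' ')) := rfl

theorem set_contains_iff {α : Type} [BEq α] [LawfulBEq α] (s : PySem.Set α) (x : α) :
    s.contains x = true ↔ x ∈ s := by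
  simp [PySem.Set.contains]

theorem toNat_ofNat' (k : Nat) : (Int.ofNat k).toNat = k := rfl

theorem hpr (b : Int) :
    PySem.List.pyRange 0 b 1 = (List.range b.toNat).map (fun k => Int.ofNat k) := by
  rw [PySem.List.pyRange_one]
  simp only [sub_zero, zero_add]
  rfl

theorem outer_write {N : Nat} (w : Nat → Nat → Char) :
    ∀ (K : Nat) (h : List (List Char)), K ≤ h.length → (∀ r ∈ h, r.length = N) →
      (List.range K).foldl (fun h x =>
          h.set x ((List.range N).foldl (fun r k => r.set k (w k x)) (h.getD x []))) h
        = (List.range K).map (fun x => (List.range N).map (fun k => w k x)) ++ h.drop K := by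
  intro K
  induction K with
  | zero => intro h _ _; simp
  | succ K ih =>
    intro h hK hrows
    rw [List.range_succ, List.foldl_append, ih h (by omega) hrows]
    simp only [List.foldl_cons, List.foldl_nil]
    have hPlen : ((List.range K).map (fun x => (List.range N).map (fun k => w k x))).length = K := by simp
    have hKlen : K < h.length := by omega
    have hgetD : ((List.range K).map (fun x => (List.range N).map (fun k => w k x)) ++ h.drop K).getD K [] = h.getD K [] := by
      rw [List.getD_eq_getElem?_getD, List.getElem?_append_right (by omega), hPlen, Nat.sub_self,
        List.getElem?_drop, Nat.add_zero, List.getD_eq_getElem?_getD]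
    rw [hgetD]
    have hrowlen : (h.getD K []).length = N := getD_row_len hrows hKlen
    rw [fold_set_range _ N (h.getD K []) (by omega)]
    rw [show (h.getD K []).drop N = [] from by rw [← hrowlen]; exact List.drop_length]
    rw [List.append_nil]
    rw [List.set_append_right _ _ (by omega), hPlen, Nat.sub_self]
    rw [List.drop_eq_getElem_cons hKlen, List.set_cons_zero]
    simp

theorem write_eq {m n : Int} (hm : 0 ≤ m) (hn : 0 ≤ n) (cols : List (List Char))
    {g1 : List (List Char)} (hL : g1.length = m.toNat) (hR : ∀ r ∈ g1, r.length = n.toNat) :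
    (PySem.List.pyRange 0 m 1).foldl (fun h i =>
      (PySem.List.pyRange 0 n 1).foldl (fun h2 j =>
        pvSet2 h2 i.toNat j.toNat ((cols.getD j.toNat []).getD i.toNat ' ')) h) g1
    = (PySem.List.pyRange 0 m 1).map (fun i =>
        (PySem.List.pyRange 0 n 1).map (fun j => (cols.getD j.toNat []).getD i.toNat ' ')) := by
  rw [hpr m, hpr n]
  simp only [List.foldl_map, List.map_map, Function.comp_def, toNat_ofNat']
  simp only [fold_pvSet2_row]
  rw [outer_write (fun y x => (cols.getD y []).getD x ' ') m.toNat g1 (by omega) hR]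
  rw [show g1.drop m.toNat = [] from by rw [← hL]; exact List.drop_length]
  rw [List.append_nil]

theorem pvG1_spec {M N : Nat} (cs : List (Int × Int)) (g : List (List Char))
    (hg : g.length = M) (hr : ∀ r ∈ g, r.length = N)
    (hb : ∀ c ∈ cs, c.1.toNat + 1 < M ∧ c.2.toNat + 1 < N) :
    (pvG1 g cs).length = M ∧ (∀ r ∈ pvG1 g cs, r.length = N) ∧
      ∀ x y : Nat, x < M → y < N →
        pvCell (pvG1 g cs) x y =
          if (∃ c ∈ cs, (x = c.1.toNat ∨ x = c.1.toNat + 1) ∧ (y = c.2.toNat ∨ y = c.2.toNat + 1))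
          then '-' else pvCell g x y :=
  fold_remove_spec cs g hg hr hb

theorem cols_eq {m n : Int} (hm : 1 ≤ m) (hn : 1 ≤ n) {g : List (List Char)}
    (hg : g.length = m.toNat) (hr : ∀ r ∈ g, r.length = n.toNat) :
    pvColsA m n (pvG1 g (pvScanB m n g)) = pvColsB m n g (pvScanB m n g) := by
  have hbnds : ∀ c ∈ pvScanB m n g, c.1.toNat + 1 < m.toNat ∧ c.2.toNat + 1 < n.toNat := by
    intro c hc
    have := mem_scanB hc
    omega
  obtain ⟨hL1, hR1, hC1⟩ := pvG1_spec (pvScanB m n g) g hg hr hbnds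
  unfold pvColsA pvColsB
  apply List.map_congr_left
  intro j hj
  rw [PySem.List.mem_pyRange_one] at hj
  dsimp only
  have hkeep : (PySem.List.pyRange 0 m 1).filterMap (fun i =>
      if pvCell (pvG1 g (pvScanB m n g)) i.toNat j.toNat ≠ '-'
      then some (pvCell (pvG1 g (pvScanB m n g)) i.toNat j.toNat) else none) =
      (PySem.List.pyRange 0 m 1).filterMap (fun i =>
      if ¬ (PySem.Set.ofList ((pvScanB m n g).flatMap (fun c =>
            [(c.1, c.2), (c.1, c.2 + 1), (c.1 + 1, c.2), (c.1 + 1, c.2 + 1)]))).contains (i, j) ∧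
          pvCell g i.toNat j.toNat ≠ '-'
      then some (pvCell g i.toNat j.toNat) else none) := by
    apply List.filterMap_congr
    intro i hi
    rw [PySem.List.mem_pyRange_one] at hi
    have hx : i.toNat < m.toNat := by omega
    have hy : j.toNat < n.toNat := by omega
    rw [hC1 i.toNat j.toNat hx hy]
    have hdm : (PySem.Set.ofList ((pvScanB m n g).flatMap (fun c =>
          [(c.1, c.2), (c.1, c.2 + 1), (c.1 + 1, c.2), (c.1 + 1, c.2 + 1)]))).contains (i, j) = true ↔
        (∃ c ∈ pvScanB m n g, (i.toNat = c.1.toNat ∨ i.toNat = c.1.toNat + 1) ∧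
          (j.toNat = c.2.toNat ∨ j.toNat = c.2.toNat + 1)) := by
      rw [set_contains_iff, PySem.Set.mem_ofList, List.mem_flatMap]
      constructor
      · rintro ⟨c, hc, hmem⟩
        have hb := mem_scanB hc
        refine ⟨c, hc, ?_⟩
        simp only [List.mem_cons, List.not_mem_nil, or_false] at hmem
        rcases hmem with h | h | h | h <;> rw [Prod.ext_iff] at h <;>
          [exact ⟨Or.inl (by omega), Or.inl (by omega)⟩;
           exact ⟨Or.inl (by omega), Or.inr (by omega)⟩;
           exact ⟨Or.inr (by omega), Or.inl (by omega)⟩;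
           exact ⟨Or.inr (by omega), Or.inr (by omega)⟩]
      · rintro ⟨c, hc, h1, h2⟩
        have hb := mem_scanB hc
        refine ⟨c, hc, ?_⟩
        simp only [List.mem_cons, List.not_mem_nil, or_false]
        rcases h1 with h1 | h1 <;> rcases h2 with h2 | h2
        · exact Or.inl (Prod.ext_iff.mpr ⟨by omega, by omega⟩)
        · exact Or.inr (Or.inl (Prod.ext_iff.mpr ⟨by omega, by omega⟩))
        · exact Or.inr (Or.inr (Or.inl (Prod.ext_iff.mpr ⟨by omega, by omega⟩)))
        · exact Or.inr (Or.inr (Or.inr (Prod.ext_iff.mpr ⟨by omega, by omega⟩)))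
    by_cases hD : ∃ c ∈ pvScanB m n g, (i.toNat = c.1.toNat ∨ i.toNat = c.1.toNat + 1) ∧
        (j.toNat = c.2.toNat ∨ j.toNat = c.2.toNat + 1)
    · have hcont := hdm.mpr hD
      rw [if_pos hD, if_neg (show ¬('-' ≠ '-') by simp), if_neg
        (fun hcond => hcond.1 hcont)]
    · rw [if_neg hD]
      have hcont : ¬ ((PySem.Set.ofList ((pvScanB m n g).flatMap (fun c =>
          [(c.1, c.2), (c.1, c.2 + 1), (c.1 + 1, c.2), (c.1 + 1, c.2 + 1)]))).contains (i, j) = true) :=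
        fun hh => hD (hdm.mp hh)
      by_cases hcg : pvCell g i.toNat j.toNat = '-'
      · rw [if_neg (not_not_intro hcg), if_neg (fun hcond => hcond.2 hcg)]
      · rw [if_pos hcg, if_pos ⟨hcont, hcg⟩]
  rw [hkeep]
  set L := (PySem.List.pyRange 0 m 1).filterMap (fun i =>
      if ¬ (PySem.Set.ofList ((pvScanB m n g).flatMap (fun c =>
            [(c.1, c.2), (c.1, c.2 + 1), (c.1 + 1, c.2), (c.1 + 1, c.2 + 1)]))).contains (i, j) ∧
          pvCell g i.toNat j.toNat ≠ '-'
      then some (pvCell g i.toNat j.toNat) else none) with hLdef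
  have hLlen : L.length ≤ m.toNat := by
    rw [hLdef]
    refine le_trans (List.length_filterMap_le _ _) ?_
    rw [PySem.List.length_pyRange_one]
    omega
  by_cases hlt : ((L.length : Int) < m)
  · rw [if_pos hlt]
  · rw [if_neg hlt, show (m - (L.length : Int)).toNat = 0 by omega, List.replicate_zero,
      List.nil_append]

theorem grid_eq {m n : Int} (hm : 1 ≤ m) (hn : 1 ≤ n) {g : List (List Char)}
    (hg : g.length = m.toNat) (hr : ∀ r ∈ g, r.length = n.toNat) :
    pvGridA m n g (pvScanB m n g) = pvGridB m n g (pvScanB m n g) := by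
  have hbnds : ∀ c ∈ pvScanB m n g, c.1.toNat + 1 < m.toNat ∧ c.2.toNat + 1 < n.toNat := by
    intro c hc
    have := mem_scanB hc
    omega
  obtain ⟨hL1, hR1, -⟩ := pvG1_spec (pvScanB m n g) g hg hr hbnds
  rw [gridA_decomp, gridB_decomp, cols_eq hm hn hg hr]
  exact write_eq (by omega) (by omega) _ hL1 hR1

theorem gridB_rect {m n : Int} (hm : 0 ≤ m) (hn : 0 ≤ n) (g : List (List Char))
    (hits : List (Int × Int)) :
    (pvGridB m n g hits).length = m.toNat ∧ ∀ r ∈ pvGridB m n g hits, r.length = n.toNat := by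
  constructor
  · simp [pvGridB, PySem.List.length_pyRange_one]
  · intro r hrr
    simp only [pvGridB, List.mem_map] at hrr
    obtain ⟨i, hi, rfl⟩ := hrr
    simp [PySem.List.length_pyRange_one]

theorem count_eq (g : List (List Char)) :
    g.foldl (fun a row => a + (row.count '-' : Int)) 0 =
      (g.map (fun row => (row.count '-' : Int))).sum := by
  simpa using PySem.List.foldl_add g (fun row : List Char => (row.count '-' : Int)) 0

theorem loops_eq (m n : Int) :
    ∀ (f : Nat) (g : List (List Char)),
      (m ≤ 0 ∨ n ≤ 0 ∨ (1 ≤ m ∧ 1 ≤ n ∧ g.length = m.toNat ∧ ∀ r ∈ g, r.length = n.toNat)) →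
      pvLoopA m n f g = pvLoopG m n f g := by
  intro f
  induction f with
  | zero => intro g _; rfl
  | succ f ih =>
    intro g hpre
    rw [pvLoopA_succ, pvLoopG_succ]
    rcases hpre with h | h | ⟨hm, hn, hg, hr⟩
    · have hSA : pvScanA m n g = [] := by
        unfold pvScanA
        rw [PySem.List.pyRange_one_eq_nil (by omega : m ≤ 0)]
        rfl
      have hSB : pvScanB m n g = [] := by
        unfold pvScanB
        rw [PySem.List.pyRange_one_eq_nil (by omega : m - 1 ≤ 0)]
        rfl
      rw [hSA, hSB]
      simp [count_eq]
    · have hSA : pvScanA m n g = [] := by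
        unfold pvScanA
        rw [List.flatMap_eq_nil_iff]
        intro i _
        rw [PySem.List.pyRange_one_eq_nil (by omega : n ≤ 0)]
        rfl
      have hSB : pvScanB m n g = [] := by
        unfold pvScanB
        rw [List.flatMap_eq_nil_iff]
        intro i _
        rw [PySem.List.pyRange_one_eq_nil (by omega : n - 1 ≤ 0)]
        rfl
      rw [hSA, hSB]
      simp [count_eq]
    · rw [scan_eq hm hn hg hr]
      by_cases hemp : pvScanB m n g = []
      · rw [hemp]
        simp [count_eq]
      · have hne1 : ¬ (((pvScanB m n g).length == 0) = true) := by simpa using hemp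
        have hne2 : ¬ ((pvScanB m n g).isEmpty = true) := by simpa using hemp
        rw [if_neg hne1, if_neg hne2, grid_eq hm hn hg hr]
        apply ih
        obtain ⟨hl, hrw⟩ := gridB_rect (m := m) (n := n) (by omega) (by omega) g (pvScanB m n g)
        exact Or.inr (Or.inr ⟨hm, hn, hl, hrw⟩)

-- ===== stack layer: pvLoopG on sorted grids = pvLoopN on column stacks =====

def pvColOf (g : List (List Char)) (j : Nat) : List Char := g.map (fun r => r.getD j ' ')
def pvFcol (g : List (List Char)) (j : Nat) : List Char := (pvColOf g j).filter (fun c => c != '-')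
def pvStk (g : List (List Char)) (j : Nat) : List Char := (pvFcol g j).reverse
def pvStacks (N : Nat) (g : List (List Char)) : List (List Char) :=
  (List.range N).map (fun j => pvStk g j)
-- all '-' of every column sit on top
def pvSortedG (M N : Nat) (g : List (List Char)) : Prop :=
  ∀ j < N, pvColOf g j = List.replicate (M - (pvFcol g j).length) '-' ++ pvFcol g j
def pvDashN (N : Nat) (g : List (List Char)) : Nat :=
  ((List.range N).map (fun j => (pvColOf g j).count '-')).sum

-- index-filtered sublist
def fIdx (l : List Char) (Q : Nat → Prop) [DecidablePred Q] : List Char :=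
  (List.range l.length).filterMap (fun s => if Q s then some (l.getD s ' ') else none)

-- the match condition the port's inner loop tests, abstracted over the column list
def pvInHit (cols : List (List Char)) (j t : Nat) : Prop :=
  j + 1 < cols.length ∧
  t + 1 < min (cols.getD j []).length (cols.getD (j+1) []).length ∧
  (cols.getD j []).getD t ' ' = (cols.getD j []).getD (t+1) ' ' ∧
  (cols.getD j []).getD (t+1) ' ' = (cols.getD (j+1) []).getD t ' ' ∧
  (cols.getD (j+1) []).getD t ' ' = (cols.getD (j+1) []).getD (t+1) ' '

def pvDeadP (cols : List (List Char)) (j t : Nat) : Prop :=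
  ∃ j' t', pvInHit cols j' t' ∧ (j = j' ∨ j = j' + 1) ∧ (t = t' ∨ t = t' + 1)

def pvCondB (a b : List Char) (t : Nat) : Bool :=
  a.getD t ' ' == a.getD (t+1) ' ' && a.getD (t+1) ' ' == b.getD t ' ' &&
  b.getD t ' ' == b.getD (t+1) ' '

def pvStep (J : Nat) (a b : List Char) (dead : List (PySem.Set Nat)) (t : Nat) :
    List (PySem.Set Nat) :=
  if pvCondB a b t then
    let d1 := dead.set J (PySem.Set.add (PySem.Set.add (dead.getD J PySem.Set.empty) t) (t+1))
    d1.set (J+1) (PySem.Set.add (PySem.Set.add (d1.getD (J+1) PySem.Set.empty) t) (t+1))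
  else dead

theorem mem_empty_set (x : Nat) : x ∈ (PySem.Set.empty : PySem.Set Nat) ↔ False := by
  simp [PySem.Set.empty]

theorem step_len (J : Nat) (a b : List Char) (dead : List (PySem.Set Nat)) (t : Nat) :
    (pvStep J a b dead t).length = dead.length := by
  unfold pvStep
  split <;> simp

theorem step_nodup (J : Nat) (a b : List Char) {dead : List (PySem.Set Nat)}
    (hnd : ∀ d ∈ dead, d.Nodup) (t : Nat) : ∀ d ∈ pvStep J a b dead t, d.Nodup := by
  have hget : ∀ q : Nat, (dead.getD q PySem.Set.empty).Nodup := by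
    intro q
    rcases Nat.lt_or_ge q dead.length with hq | hq
    · rw [List.getD_eq_getElem?_getD, List.getElem?_eq_getElem hq]
      exact hnd _ (List.getElem_mem hq)
    · rw [List.getD_eq_getElem?_getD, List.getElem?_eq_none (by omega)]
      exact List.nodup_nil
  intro d hd
  unfold pvStep at hd
  split at hd
  · rcases List.mem_or_eq_of_mem_set hd with hd1 | hd1
    · rcases List.mem_or_eq_of_mem_set hd1 with hd2 | hd2
      · exact hnd _ hd2
      · subst hd2
        exact PySem.Set.nodup_add _ _ (PySem.Set.nodup_add _ _ (hget J))
    · subst hd1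
      have : ∀ q : Nat, ((dead.set J
          (PySem.Set.add (PySem.Set.add (dead.getD J PySem.Set.empty) t) (t+1))).getD q
            PySem.Set.empty).Nodup := by
        intro q
        rw [getD_set_gen]
        split
        · exact PySem.Set.nodup_add _ _ (PySem.Set.nodup_add _ _ (hget J))
        · exact hget q
      exact PySem.Set.nodup_add _ _ (PySem.Set.nodup_add _ _ (this (J+1)))
  · exact hnd _ hd

theorem step_mem (J : Nat) (a b : List Char) {dead : List (PySem.Set Nat)}
    (hJ : J + 1 < dead.length) (t : Nat) (q x : Nat) :
    x ∈ (pvStep J a b dead t).getD q PySem.Set.empty ↔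
      x ∈ dead.getD q PySem.Set.empty ∨
      (pvCondB a b t = true ∧ (q = J ∨ q = J + 1) ∧ (x = t ∨ x = t + 1)) := by
  unfold pvStep
  by_cases hc : pvCondB a b t = true
  · rw [if_pos hc]
    have hJJ : J < dead.length := by omega
    have hd1J1 : ((dead.set J (PySem.Set.add (PySem.Set.add (dead.getD J PySem.Set.empty) t)
        (t+1))).getD (J+1) PySem.Set.empty) = dead.getD (J+1) PySem.Set.empty := by
      rw [getD_set_gen, if_neg (by omega)]
    have hlen1 : (dead.set J (PySem.Set.add (PySem.Set.add (dead.getD J PySem.Set.empty) t)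
        (t+1))).length = dead.length := by simp
    rw [getD_set_gen, hlen1, hd1J1]
    by_cases hq1 : q = J + 1
    · subst hq1
      rw [if_pos ⟨rfl, hJ⟩]
      rw [PySem.Set.mem_add, PySem.Set.mem_add]
      constructor
      · rintro ((h | h) | h)
        · exact Or.inl h
        · exact Or.inr ⟨hc, Or.inr rfl, Or.inl h⟩
        · exact Or.inr ⟨hc, Or.inr rfl, Or.inr h⟩
      · rintro (h | ⟨-, -, (h | h)⟩)
        · exact Or.inl (Or.inl h)
        · exact Or.inl (Or.inr h)
        · exact Or.inr h
    · rw [if_neg (by tauto), getD_set_gen]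
      by_cases hq2 : q = J
      · subst hq2
        rw [if_pos ⟨rfl, hJJ⟩, PySem.Set.mem_add, PySem.Set.mem_add]
        constructor
        · rintro ((h | h) | h)
          · exact Or.inl h
          · exact Or.inr ⟨hc, Or.inl rfl, Or.inl h⟩
          · exact Or.inr ⟨hc, Or.inl rfl, Or.inr h⟩
        · rintro (h | ⟨-, -, (h | h)⟩)
          · exact Or.inl (Or.inl h)
          · exact Or.inl (Or.inr h)
          · exact Or.inr h
      · rw [if_neg (by tauto)]
        constructor
        · exact Or.inl
        · rintro (h | ⟨-, (h | h), -⟩)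
          · exact h
          · exact absurd h hq2
          · exact absurd h hq1
  · rw [if_neg hc]
    constructor
    · exact Or.inl
    · rintro (h | ⟨h, -, -⟩)
      · exact h
      · exact absurd h hc

theorem inner_spec (J : Nat) (a b : List Char) :
    ∀ (K : Nat) (dead : List (PySem.Set Nat)), J + 1 < dead.length →
      (∀ d ∈ dead, d.Nodup) →
      ((List.range K).foldl (pvStep J a b) dead).length = dead.length ∧
      (∀ d ∈ (List.range K).foldl (pvStep J a b) dead, d.Nodup) ∧
      ∀ q x : Nat, x ∈ ((List.range K).foldl (pvStep J a b) dead).getD q PySem.Set.empty ↔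
        x ∈ dead.getD q PySem.Set.empty ∨
        ((q = J ∨ q = J + 1) ∧ ∃ t < K, pvCondB a b t = true ∧ (x = t ∨ x = t + 1)) := by
  intro K
  induction K with
  | zero =>
    intro dead hJ hnd
    refine ⟨rfl, hnd, fun q x => ?_⟩
    simp
  | succ K ih =>
    intro dead hJ hnd
    obtain ⟨ihl, ihnd, ihm⟩ := ih dead hJ hnd
    rw [List.range_succ, List.foldl_append, List.foldl_cons, List.foldl_nil]
    have hJ' : J + 1 < ((List.range K).foldl (pvStep J a b) dead).length := by omega
    refine ⟨by rw [step_len, ihl], step_nodup J a b ihnd K, fun q x => ?_⟩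
    rw [step_mem J a b hJ' K q x, ihm q x]
    constructor
    · rintro ((h | ⟨hq, t, ht, hc, hx⟩) | ⟨hc, hq, hx⟩)
      · exact Or.inl h
      · exact Or.inr ⟨hq, t, by omega, hc, hx⟩
      · exact Or.inr ⟨hq, K, by omega, hc, hx⟩
    · rintro (h | ⟨hq, t, ht, hc, hx⟩)
      · exact Or.inl (Or.inl h)
      · rcases Nat.lt_or_ge t K with htK | htK
        · exact Or.inl (Or.inr ⟨hq, t, htK, hc, hx⟩)
        · have : t = K := by omega
          subst this
          exact Or.inr ⟨hc, hq, hx⟩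

theorem outer_spec (cols : List (List Char)) :
    ∀ (C : Nat) (dead : List (PySem.Set Nat)), (∀ j < C, j + 1 < dead.length) →
      (∀ d ∈ dead, d.Nodup) →
      ((List.range C).foldl (fun dead j =>
          (List.range (min (cols.getD j []).length (cols.getD (j+1) []).length - 1)).foldl
            (pvStep j (cols.getD j []) (cols.getD (j+1) [])) dead) dead).length = dead.length ∧
      (∀ d ∈ (List.range C).foldl (fun dead j =>
          (List.range (min (cols.getD j []).length (cols.getD (j+1) []).length - 1)).foldl
            (pvStep j (cols.getD j []) (cols.getD (j+1) [])) dead) dead, d.Nodup) ∧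
      ∀ q x : Nat, x ∈ ((List.range C).foldl (fun dead j =>
          (List.range (min (cols.getD j []).length (cols.getD (j+1) []).length - 1)).foldl
            (pvStep j (cols.getD j []) (cols.getD (j+1) [])) dead) dead).getD q PySem.Set.empty ↔
        x ∈ dead.getD q PySem.Set.empty ∨
        ∃ j < C, (q = j ∨ q = j + 1) ∧
          ∃ t, t < min (cols.getD j []).length (cols.getD (j+1) []).length - 1 ∧
            pvCondB (cols.getD j []) (cols.getD (j+1) []) t = true ∧ (x = t ∨ x = t + 1) := by
  intro C
  induction C with
  | zero =>
    intro dead _ hnd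
    refine ⟨rfl, hnd, fun q x => ?_⟩
    simp
  | succ C ih =>
    intro dead hC hnd
    obtain ⟨ihl, ihnd, ihm⟩ := ih dead (fun j hj => hC j (by omega)) hnd
    rw [List.range_succ, List.foldl_append, List.foldl_cons, List.foldl_nil]
    have hC' : C + 1 < ((List.range C).foldl (fun dead j =>
        (List.range (min (cols.getD j []).length (cols.getD (j+1) []).length - 1)).foldl
          (pvStep j (cols.getD j []) (cols.getD (j+1) [])) dead) dead).length := by
      rw [ihl]; exact hC C (by omega)
    obtain ⟨il, ind, im⟩ := inner_spec C (cols.getD C []) (cols.getD (C+1) [])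
      (min (cols.getD C []).length (cols.getD (C+1) []).length - 1) _ hC' ihnd
    refine ⟨by rw [il, ihl], ind, fun q x => ?_⟩
    rw [im q x, ihm q x]
    constructor
    · rintro ((h | ⟨j, hj, hq, t, ht, hc, hx⟩) | ⟨hq, t, ht, hc, hx⟩)
      · exact Or.inl h
      · exact Or.inr ⟨j, by omega, hq, t, ht, hc, hx⟩
      · exact Or.inr ⟨C, by omega, hq, t, ht, hc, hx⟩
    · rintro (h | ⟨j, hj, hq, t, ht, hc, hx⟩)
      · exact Or.inl (Or.inl h)
      · rcases Nat.lt_or_ge j C with hjC | hjC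
        · exact Or.inl (Or.inr ⟨j, hjC, hq, t, ht, hc, hx⟩)
        · have : j = C := by omega
          subst this
          exact Or.inr ⟨hq, t, ht, hc, hx⟩

theorem pvDead_eq (n : Int) (cols : List (List Char)) :
    pvDead n cols = (List.range (n-1).toNat).foldl (fun dead j =>
        (List.range (min (cols.getD j []).length (cols.getD (j+1) []).length - 1)).foldl
          (pvStep j (cols.getD j []) (cols.getD (j+1) [])) dead)
      ((PySem.List.pyRange 0 n 1).map (fun _ => PySem.Set.empty)) := by
  unfold pvDead
  rw [hpr (n-1), List.foldl_map]
  rfl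

theorem pvDead_spec (n : Int) (cols : List (List Char)) (hlen : cols.length = n.toNat) :
    (pvDead n cols).length = n.toNat ∧
    (∀ d ∈ pvDead n cols, d.Nodup) ∧
    (∀ j t : Nat, t ∈ (pvDead n cols).getD j PySem.Set.empty ↔ pvDeadP cols j t) := by
  have hlen0 : ((PySem.List.pyRange 0 n 1).map
      (fun _ => (PySem.Set.empty : PySem.Set Nat))).length = n.toNat := by
    rw [List.length_map, PySem.List.length_pyRange_one]
    omega
  have hnd0 : ∀ d ∈ (PySem.List.pyRange 0 n 1).map
      (fun _ => (PySem.Set.empty : PySem.Set Nat)), d.Nodup := by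
    intro d hd
    rcases List.mem_map.mp hd with ⟨_, _, rfl⟩
    exact List.nodup_nil
  have hget0 : ∀ q : Nat, ((PySem.List.pyRange 0 n 1).map
      (fun _ => (PySem.Set.empty : PySem.Set Nat))).getD q PySem.Set.empty = PySem.Set.empty := by
    intro q
    rw [List.getD_eq_getElem?_getD, List.getElem?_map]
    cases h : (PySem.List.pyRange 0 n 1)[q]? <;> rfl
  have hCb : ∀ j : Nat, j < (n-1).toNat → j + 1 < ((PySem.List.pyRange 0 n 1).map
      (fun _ => (PySem.Set.empty : PySem.Set Nat))).length := by
    intro j hj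
    rw [hlen0]
    omega
  obtain ⟨ol, ond, om⟩ := outer_spec cols (n-1).toNat _ hCb hnd0
  rw [pvDead_eq]
  refine ⟨by rw [ol, hlen0], ond, fun j t => ?_⟩
  rw [om j t, hget0 j, mem_empty_set]
  unfold pvDeadP pvInHit pvCondB
  constructor
  · rintro (h | ⟨j', hj', hq, t', ht', hc, hx⟩)
    · exact absurd h id
    · rw [Bool.and_eq_true, Bool.and_eq_true, beq_iff_eq, beq_iff_eq, beq_iff_eq] at hc
      exact ⟨j', t', ⟨by omega, by omega, hc.1.1, hc.1.2, hc.2⟩, hq, hx⟩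
  · rintro ⟨j', t', ⟨hjlt, htlt, e1, e2, e3⟩, hq, hx⟩
    refine Or.inr ⟨j', by omega, hq, t', by omega, ?_, hx⟩
    rw [Bool.and_eq_true, Bool.and_eq_true, beq_iff_eq, beq_iff_eq, beq_iff_eq]
    exact ⟨⟨e1, e2⟩, e3⟩

theorem length_colOf (g : List (List Char)) (j : Nat) : (pvColOf g j).length = g.length := by
  simp [pvColOf]

theorem cell_colOf (g : List (List Char)) {i : Nat} (j : Nat) (h : i < g.length) :
    pvCell g i j = (pvColOf g j).getD i ' ' := by
  unfold pvCell pvColOf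
  rw [List.getD_eq_getElem?_getD (l := g.map _), List.getElem?_map, List.getElem?_eq_getElem h]
  rw [List.getD_eq_getElem?_getD (l := g), List.getElem?_eq_getElem h]
  rfl

theorem Fcol_le {M N : Nat} {g : List (List Char)} (hg : g.length = M)
    (hs : pvSortedG M N g) {j : Nat} (hj : j < N) : (pvFcol g j).length ≤ M := by
  have h1 := congrArg List.length (hs j hj)
  rw [length_colOf, hg, List.length_append, List.length_replicate] at h1
  omega

theorem cell_of_sorted {M N : Nat} {g : List (List Char)} (hg : g.length = M)
    (hs : pvSortedG M N g) {i j : Nat} (hj : j < N) (hi : i < M) :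
    pvCell g i j = if i < M - (pvFcol g j).length then '-'
      else (pvFcol g j).getD (i - (M - (pvFcol g j).length)) ' ' := by
  rw [cell_colOf g j (by omega), hs j hj]
  by_cases hlt : i < M - (pvFcol g j).length
  · rw [if_pos hlt, List.getD_eq_getElem?_getD, List.getElem?_append_left (by simpa using hlt)]
    simp [List.getElem?_replicate, hlt]
  · rw [if_neg hlt, List.getD_eq_getElem?_getD,
      List.getElem?_append_right (by simp; omega), List.length_replicate,
      List.getD_eq_getElem?_getD]

theorem mem_Fcol_ne {g : List (List Char)} {j : Nat} {c : Char} (h : c ∈ pvFcol g j) :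
    c ≠ '-' := by
  have := (List.mem_filter.mp h).2
  simpa using this

theorem getD_reverse {l : List Char} {t : Nat} (h : t < l.length) (d : Char) :
    l.reverse.getD t d = l.getD (l.length - 1 - t) d := by
  rw [List.getD_eq_getElem?_getD, List.getElem?_eq_getElem (by simpa using h),
    List.getElem_reverse, List.getD_eq_getElem?_getD, List.getElem?_eq_getElem (by omega)]

theorem getD_stacks {N : Nat} (g : List (List Char)) {j : Nat} (hj : j < N) :
    (pvStacks N g).getD j [] = pvStk g j := by
  unfold pvStacks
  rw [List.getD_eq_getElem?_getD, List.getElem?_map, List.getElem?_range hj]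
  rfl

theorem length_stacks (N : Nat) (g : List (List Char)) : (pvStacks N g).length = N := by
  simp [pvStacks]

theorem Fget_ne {g : List (List Char)} {j s : Nat} (hs : s < (pvFcol g j).length) :
    (pvFcol g j).getD s ' ' ≠ '-' := by
  rw [List.getD_eq_getElem?_getD, List.getElem?_eq_getElem hs]
  exact mem_Fcol_ne (List.getElem_mem hs)

theorem cell_dash_iff {M N : Nat} {g : List (List Char)} (hg : g.length = M)
    (hsor : pvSortedG M N g) {i j : Nat} (hj : j < N) (hi : i < M) :
    (pvCell g i j = '-' ↔ i < M - (pvFcol g j).length) := by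
  have hle := Fcol_le hg hsor hj
  rw [cell_of_sorted hg hsor hj hi]
  by_cases hlt : i < M - (pvFcol g j).length
  · simp [hlt]
  · simp only [if_neg hlt]
    have hidx : i - (M - (pvFcol g j).length) < (pvFcol g j).length := by omega
    exact ⟨fun h => absurd h (Fget_ne hidx), fun h => absurd h hlt⟩

theorem length_stk (g : List (List Char)) (j : Nat) :
    (pvStk g j).length = (pvFcol g j).length := by simp [pvStk]

theorem cell_stk {M N : Nat} {g : List (List Char)} (hg : g.length = M)
    (hsor : pvSortedG M N g) {i j : Nat} (hj : j < N) (hi : i < M)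
    (hge : M - (pvFcol g j).length ≤ i) :
    pvCell g i j = (pvStk g j).getD (M - 1 - i) ' ' := by
  have hle := Fcol_le hg hsor hj
  have h0pos : 0 < (pvFcol g j).length := by omega
  rw [cell_of_sorted hg hsor hj hi, if_neg (by omega)]
  unfold pvStk
  rw [getD_reverse (by omega : M - 1 - i < (pvFcol g j).length)]
  congr 1
  omega

theorem inHit_bounds {N : Nat} {g : List (List Char)} {j t : Nat}
    (h : pvInHit (pvStacks N g) j t) :
    j + 1 < N ∧ t + 1 < (pvFcol g j).length ∧ t + 1 < (pvFcol g (j+1)).length := by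
  obtain ⟨hj, hmin, -⟩ := h
  rw [length_stacks] at hj
  rw [getD_stacks g (by omega), getD_stacks g hj, length_stk, length_stk] at hmin
  exact ⟨hj, by omega, by omega⟩

-- grid corner (i,j) matched  ↔  stack pair (j, M-2-i) matched
theorem corner_iff {M N : Nat} {g : List (List Char)} (hg : g.length = M)
    (hsor : pvSortedG M N g) {i j : Nat} (hi1 : i + 1 < M) (hj1 : j + 1 < N) :
    ((pvCell g i j ≠ '-' ∧ pvCell g i j = pvCell g i (j+1) ∧
      pvCell g i j = pvCell g (i+1) j ∧ pvCell g i j = pvCell g (i+1) (j+1)) ↔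
     pvInHit (pvStacks N g) j (M - 2 - i)) := by
  have hle0 := Fcol_le hg hsor (show j < N by omega)
  have hle1 := Fcol_le hg hsor hj1
  have hS0 : (pvStacks N g).getD j [] = pvStk g j := getD_stacks g (by omega)
  have hS1 : (pvStacks N g).getD (j+1) [] = pvStk g (j+1) := getD_stacks g hj1
  have ht1 : M - 2 - i + 1 = M - 1 - i := by omega
  have ht2 : M - 1 - (i + 1) = M - 2 - i := by omega
  constructor
  · rintro ⟨hne, e1, e2, e3⟩
    have hb1 : M - (pvFcol g j).length ≤ i := by
      by_contra hcon
      exact hne ((cell_dash_iff hg hsor (by omega) (by omega)).mpr (by omega))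
    have hb3 : M - (pvFcol g (j+1)).length ≤ i := by
      by_contra hcon
      push_neg at hcon
      have hdash : pvCell g i (j+1) = '-' :=
        (cell_dash_iff hg hsor hj1 (by omega)).mpr (by omega)
      exact hne (e1.trans hdash)
    have cA : pvCell g i j = (pvStk g j).getD (M - 1 - i) ' ' :=
      cell_stk hg hsor (by omega) (by omega) hb1
    have cB : pvCell g (i+1) j = (pvStk g j).getD (M - 2 - i) ' ' := by
      rw [cell_stk hg hsor (show j < N by omega) (by omega) (by omega), ht2]
    have cC : pvCell g i (j+1) = (pvStk g (j+1)).getD (M - 1 - i) ' ' :=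
      cell_stk hg hsor hj1 (by omega) hb3
    have cD : pvCell g (i+1) (j+1) = (pvStk g (j+1)).getD (M - 2 - i) ' ' := by
      rw [cell_stk hg hsor hj1 (by omega) (by omega), ht2]
    refine ⟨by rw [length_stacks]; omega, ?_, ?_, ?_, ?_⟩
    · rw [hS0, hS1, length_stk, length_stk]
      omega
    · rw [hS0, ht1, ← cA, ← cB]
      exact e2.symm
    · rw [hS0, hS1, ht1, ← cA, ← cD]
      exact e3
    · rw [hS1, ht1, ← cC, ← cD]
      exact e3.symm.trans e1
  · rintro ⟨hjN, hmin, q1, q2, q3⟩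
    rw [hS0, hS1, length_stk, length_stk] at hmin
    rw [hS0] at q1 q2
    rw [hS1] at q2 q3
    have hb1 : M - (pvFcol g j).length ≤ i := by omega
    have hb3 : M - (pvFcol g (j+1)).length ≤ i := by omega
    have cA : pvCell g i j = (pvStk g j).getD (M - 1 - i) ' ' :=
      cell_stk hg hsor (by omega) (by omega) hb1
    have cB : pvCell g (i+1) j = (pvStk g j).getD (M - 2 - i) ' ' := by
      rw [cell_stk hg hsor (show j < N by omega) (by omega) (by omega), ht2]
    have cC : pvCell g i (j+1) = (pvStk g (j+1)).getD (M - 1 - i) ' ' :=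
      cell_stk hg hsor hj1 (by omega) hb3
    have cD : pvCell g (i+1) (j+1) = (pvStk g (j+1)).getD (M - 2 - i) ' ' := by
      rw [cell_stk hg hsor hj1 (by omega) (by omega), ht2]
    have hne : pvCell g i j ≠ '-' := by
      intro hd
      have := (cell_dash_iff hg hsor (show j < N by omega) (by omega)).mp hd
      omega
    rw [ht1] at q1 q2 q3
    refine ⟨hne, ?_, ?_, ?_⟩
    · rw [cA, cC]
      rw [q2, q3]
    · rw [cA, cB]
      exact q1.symm
    · rw [cA, cD]
      exact q2

theorem mem_scanB_iff {m n : Int} {g : List (List Char)} {x y : Int} :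
    (x, y) ∈ pvScanB m n g ↔ (0 ≤ x ∧ x < m - 1 ∧ 0 ≤ y ∧ y < n - 1 ∧
      (pvCell g x.toNat y.toNat ≠ '-' ∧
       pvCell g x.toNat y.toNat = pvCell g x.toNat (y.toNat+1) ∧
       pvCell g x.toNat y.toNat = pvCell g (x.toNat+1) y.toNat ∧
       pvCell g x.toNat y.toNat = pvCell g (x.toNat+1) (y.toNat+1))) := by
  unfold pvScanB
  simp only [List.mem_flatMap, List.mem_filterMap, PySem.List.mem_pyRange_one]
  constructor
  · rintro ⟨i, hi, j, hj, hf⟩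
    split at hf
    · rename_i hcond
      injection hf with hf'
      rw [Prod.ext_iff] at hf'
      obtain ⟨rfl, rfl⟩ : i = x ∧ j = y := ⟨hf'.1, hf'.2⟩
      exact ⟨hi.1, hi.2, hj.1, hj.2, hcond⟩
    · exact absurd hf (by simp)
  · rintro ⟨hx0, hx1, hy0, hy1, hcond⟩
    exact ⟨x, ⟨hx0, hx1⟩, y, ⟨hy0, hy1⟩, by rw [if_pos hcond]⟩

theorem scanB_empty_iff {m n : Int} {M N : Nat} (hM : M = m.toNat) (hN : N = n.toNat)
    (hm : 1 ≤ m) (hn : 1 ≤ n) {g : List (List Char)} (hg : g.length = M)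
    (hsor : pvSortedG M N g) :
    pvScanB m n g = [] ↔ ∀ j t : Nat, ¬ pvInHit (pvStacks N g) j t := by
  constructor
  · intro hemp j t hhit
    obtain ⟨hjN, hb0, hb1⟩ := inHit_bounds hhit
    have hle0 := Fcol_le hg hsor (show j < N by omega)
    have htM : t + 1 < M := by omega
    have hteq : M - 2 - (M - 2 - t) = t := by omega
    have hcond := (corner_iff hg hsor (show (M - 2 - t) + 1 < M by omega) hjN).mpr
      (by rw [hteq]; exact hhit)
    have hmem : (((M - 2 - t : Nat) : Int), (j : Int)) ∈ pvScanB m n g := by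
      refine mem_scanB_iff.mpr ⟨by omega, by omega, by omega, by omega, ?_⟩
      simpa using hcond
    rw [hemp] at hmem
    exact List.not_mem_nil hmem
  · intro hall
    by_contra hne
    obtain ⟨⟨x, y⟩, hmem⟩ := List.exists_mem_of_ne_nil _ hne
    obtain ⟨hx0, hx1, hy0, hy1, hcond⟩ := mem_scanB_iff.mp hmem
    have hb := mem_scanB (m := m) (n := n) hmem
    exact hall y.toNat (M - 2 - x.toNat)
      ((corner_iff hg hsor (by omega) (by omega)).mp hcond)

-- transpose counting: row-wise '-' total = column-wise '-' total
theorem sum_map_add_nat {α : Type} (l : List α) (f g : α → Nat) :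
    (l.map (fun x => f x + g x)).sum = (l.map f).sum + (l.map g).sum := by
  induction l with
  | nil => rfl
  | cons a l ih => simp [ih]; omega

theorem count_getD (c : Char) :
    ∀ r : List Char, r.count c = ((List.range r.length).map
      (fun j => if r.getD j ' ' = c then 1 else 0)).sum := by
  intro r
  induction r with
  | nil => rfl
  | cons a r ih =>
    rw [List.length_cons, List.range_succ_eq_map, List.map_cons, List.sum_cons, List.map_map]
    have h2 : (List.map ((fun j => if (a :: r).getD j ' ' = c then 1 else 0) ∘ Nat.succ)
        (List.range r.length)).sum = r.count c := by
      simp only [Function.comp_def, List.getD_cons_succ]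
      exact ih.symm
    rw [h2, List.getD_cons_zero]
    by_cases hac : a = c
    · subst hac
      rw [List.count_cons_self, if_pos rfl]
      omega
    · rw [List.count_cons_of_ne hac, if_neg hac]
      omega

theorem rowdash_eq_coldash {N : Nat} {g : List (List Char)} (hr : ∀ r ∈ g, r.length = N) :
    (g.map (fun row => row.count '-')).sum = pvDashN N g := by
  induction g with
  | nil => simp [pvDashN, pvColOf]
  | cons r g ih =>
    have hrg : ∀ r' ∈ g, r'.length = N := fun r' h' => hr r' (List.mem_cons_of_mem _ h')
    have hrlen : r.length = N := hr r List.mem_cons_self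
    have hcol : ∀ j, pvColOf (r :: g) j = r.getD j ' ' :: pvColOf g j := fun _ => rfl
    rw [List.map_cons, List.sum_cons, ih hrg]
    unfold pvDashN
    have hstep : ((List.range N).map (fun j => (pvColOf (r :: g) j).count '-')).sum =
        ((List.range N).map (fun j => (if r.getD j ' ' = '-' then 1 else 0) +
          (pvColOf g j).count '-')).sum := by
      congr 1
      apply List.map_congr_left
      intro j _
      rw [hcol j]
      by_cases h : r.getD j ' ' = '-'
      · rw [if_pos h, h, List.count_cons_self]
        omega
      · rw [if_neg h, List.count_cons_of_ne h]
        omega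
    rw [hstep, sum_map_add_nat]
    rw [count_getD '-' r, hrlen]

theorem dash_count_of_sorted {M N : Nat} {g : List (List Char)} (hg : g.length = M)
    (hs : pvSortedG M N g) {j : Nat} (hj : j < N) :
    (pvColOf g j).count '-' = M - (pvFcol g j).length := by
  rw [hs j hj, List.count_append, List.count_replicate_self,
    List.count_eq_zero.mpr (fun h => mem_Fcol_ne h rfl)]
  omega

-- ===== fIdx machinery =====

theorem filterMap_ite {α β : Type} (v : α → β) (Q : α → Prop) [DecidablePred Q] :
    ∀ L : List α, L.filterMap (fun s => if Q s then some (v s) else none) =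
      (L.filter (fun s => decide (Q s))).map v := by
  intro L
  induction L with
  | nil => rfl
  | cons a L ih =>
    rw [List.filterMap_cons, List.filter_cons]
    by_cases h : Q a
    · simp [h, ih]
    · simp [h, ih]

theorem fIdx_congr {l : List Char} {Q Q' : Nat → Prop} [DecidablePred Q] [DecidablePred Q']
    (h : ∀ s < l.length, (Q s ↔ Q' s)) : fIdx l Q = fIdx l Q' := by
  unfold fIdx
  apply List.filterMap_congr
  intro s hs
  rw [List.mem_range] at hs
  by_cases hq : Q s
  · rw [if_pos hq, if_pos ((h s hs).mp hq)]
  · rw [if_neg hq, if_neg (fun hq' => hq ((h s hs).mpr hq'))]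

theorem fIdx_cons (a : Char) (l : List Char) (Q : Nat → Prop) [DecidablePred Q] :
    fIdx (a :: l) Q = (if Q 0 then [a] else []) ++ fIdx l (fun s => Q (s+1)) := by
  unfold fIdx
  rw [List.length_cons, List.range_succ_eq_map, List.filterMap_cons, List.filterMap_map]
  by_cases h : Q 0
  · rw [if_pos h, if_pos h, List.getD_cons_zero]
    congr 1
  · rw [if_neg h, if_neg h, List.nil_append]
    congr 1

theorem fIdx_append_singleton (l : List Char) (a : Char) (Q : Nat → Prop) [DecidablePred Q] :
    fIdx (l ++ [a]) Q = fIdx l Q ++ (if Q l.length then [a] else []) := by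
  unfold fIdx
  rw [List.length_append, List.length_singleton, List.range_succ, List.filterMap_append]
  congr 1
  · apply List.filterMap_congr
    intro s hs
    rw [List.mem_range] at hs
    have : (l ++ [a]).getD s ' ' = l.getD s ' ' := by
      rw [List.getD_eq_getElem?_getD, List.getElem?_append_left hs, List.getD_eq_getElem?_getD]
    rw [this]
  · have hgd : (l ++ [a]).getD l.length ' ' = a := by
      rw [List.getD_eq_getElem?_getD, List.getElem?_append_right (Nat.le_refl _), Nat.sub_self]
      rfl
    rw [List.filterMap_cons, List.filterMap_nil, hgd]
    by_cases h : Q l.length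
    · rw [if_pos h, if_pos h]
    · rw [if_neg h, if_neg h]

theorem fIdx_rev (l : List Char) (Q : Nat → Prop) [DecidablePred Q] :
    (fIdx l Q).reverse = fIdx l.reverse (fun t => Q (l.length - 1 - t)) := by
  induction l generalizing Q with
  | nil => rfl
  | cons a l ih =>
    rw [fIdx_cons, List.reverse_append, List.reverse_cons, fIdx_append_singleton,
      ih (fun s => Q (s+1))]
    congr 1
    · apply fIdx_congr
      intro t ht
      rw [List.length_reverse] at ht
      have h1 : l.length - 1 - t + 1 = (a :: l).length - 1 - t := by
        rw [List.length_cons]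
        omega
      rw [h1]
    · have h2 : (a :: l).length - 1 - l.reverse.length = 0 := by
        rw [List.length_cons, List.length_reverse]
        omega
      rw [h2]
      split <;> rfl

theorem mem_fIdx {l : List Char} {Q : Nat → Prop} [DecidablePred Q] {c : Char}
    (h : c ∈ fIdx l Q) : ∃ s, s < l.length ∧ c = l.getD s ' ' := by
  unfold fIdx at h
  rw [List.mem_filterMap] at h
  obtain ⟨s, hs, hf⟩ := h
  rw [List.mem_range] at hs
  split at hf
  · exact ⟨s, hs, by injection hf with h'; exact h'.symm⟩
  · exact absurd hf (by simp)

theorem length_fIdx (l : List Char) (Q : Nat → Prop) [DecidablePred Q] :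
    (fIdx l Q).length = ((List.range l.length).filter (fun s => decide (Q s))).length := by
  unfold fIdx
  rw [filterMap_ite, List.length_map]

-- enumerate-based filter (the port's column rebuild) is an fIdx
theorem enum_filterMap (S : PySem.Set Nat) :
    ∀ (l : List Char) (s : Nat),
      (PySem.List.enumerate l (s : Int)).filterMap (fun tc =>
        if S.contains tc.1.toNat then none else some tc.2) =
      fIdx l (fun t => ¬ ((s + t) ∈ S)) := by
  intro l
  induction l with
  | nil => intro s; rfl
  | cons a l ih =>
    intro s
    rw [PySem.List.enumerate_cons, List.filterMap_cons]
    have htn : ((s : Int), a).1.toNat = s := Int.toNat_natCast s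
    have hcast : ((s : Int) + 1) = ((s + 1 : Nat) : Int) := by push_cast; ring
    have htail : (PySem.List.enumerate l ((s : Int) + 1)).filterMap (fun tc =>
        if S.contains tc.1.toNat then none else some tc.2) =
        fIdx l (fun t => ¬ ((s + 1 + t) ∈ S)) := by
      rw [hcast]
      exact ih (s + 1)
    have htail2 : fIdx l (fun t => ¬ ((s + 1 + t) ∈ S)) =
        fIdx l (fun t => ¬ ((s + (t + 1)) ∈ S)) := by
      apply fIdx_congr
      intro t _
      rw [show s + 1 + t = s + (t + 1) by omega]
    by_cases h : s ∈ S
    · have hc : (if S.contains ((s : Int), a).1.toNat then none else some ((s : Int), a).2) =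
          (none : Option Char) := by
        rw [htn, if_pos ((PySem.Set.contains_iff S s).mpr h)]
      rw [hc, fIdx_cons, if_neg (not_not_intro (by simpa using h)), List.nil_append,
        htail, htail2]
    · have hc : (if S.contains ((s : Int), a).1.toNat then none else some ((s : Int), a).2) =
          some a := by
        rw [htn, if_neg (fun hct => h ((PySem.Set.contains_iff S s).mp hct))]
      rw [hc, fIdx_cons, if_pos (by simpa using h)]
      show a :: _ = a :: _
      rw [htail, htail2]
      rfl

-- ===== round lemma pieces =====

theorem pvLoopN_succ (n : Int) (f : Nat) (cols : List (List Char)) (removed : Int) :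
    pvLoopN n (f+1) cols removed =
      if ((((pvDead n cols).map (fun d => (d.length : Int))).sum) == 0) = true then removed
      else pvLoopN n f
        ((PySem.List.enumerate cols).map (fun jc =>
          (PySem.List.enumerate jc.2).filterMap (fun tc =>
            if (pvDead n cols).getD jc.1.toNat PySem.Set.empty |>.contains tc.1.toNat then none
            else some tc.2)))
        (removed + ((pvDead n cols).map (fun d => (d.length : Int))).sum) := rfl

-- ===== doomed cells vs dead stack indices =====

def pvDoomed (hits : List (Int × Int)) : PySem.Set (Int × Int) :=
  PySem.Set.ofList (hits.flatMap (fun c =>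
    [(c.1, c.2), (c.1, c.2 + 1), (c.1 + 1, c.2), (c.1 + 1, c.2 + 1)]))

def pvDJ (n : Int) (g : List (List Char)) (j : Nat) : PySem.Set Nat :=
  (pvDead n (pvStacks n.toNat g)).getD j PySem.Set.empty

theorem doomed_mem (hits : List (Int × Int)) (x y : Int) :
    (pvDoomed hits).contains (x, y) = true ↔
      ∃ c ∈ hits, (x = c.1 ∨ x = c.1 + 1) ∧ (y = c.2 ∨ y = c.2 + 1) := by
  unfold pvDoomed
  rw [set_contains_iff, PySem.Set.mem_ofList, List.mem_flatMap]
  constructor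
  · rintro ⟨c, hc, hmem⟩
    refine ⟨c, hc, ?_⟩
    simp only [List.mem_cons, List.not_mem_nil, or_false] at hmem
    rcases hmem with h | h | h | h <;> rw [Prod.ext_iff] at h <;>
      [exact ⟨Or.inl h.1, Or.inl h.2⟩;
       exact ⟨Or.inl h.1, Or.inr h.2⟩;
       exact ⟨Or.inr h.1, Or.inl h.2⟩;
       exact ⟨Or.inr h.1, Or.inr h.2⟩]
  · rintro ⟨c, hc, h1, h2⟩
    refine ⟨c, hc, ?_⟩
    simp only [List.mem_cons, List.not_mem_nil, or_false]
    rcases h1 with h1 | h1 <;> rcases h2 with h2 | h2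
    · exact Or.inl (Prod.ext_iff.mpr ⟨h1, h2⟩)
    · exact Or.inr (Or.inl (Prod.ext_iff.mpr ⟨h1, h2⟩))
    · exact Or.inr (Or.inr (Or.inl (Prod.ext_iff.mpr ⟨h1, h2⟩)))
    · exact Or.inr (Or.inr (Or.inr (Prod.ext_iff.mpr ⟨h1, h2⟩)))

-- a matched stack pair yields its corner in the scan list
theorem hit_corner_mem {m n : Int} {M N : Nat} (hM : M = m.toNat) (hN : N = n.toNat)
    (hm : 1 ≤ m) {g : List (List Char)} (hg : g.length = M) (hsor : pvSortedG M N g)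
    {j t : Nat} (hhit : pvInHit (pvStacks N g) j t) :
    (((M - 2 - t : Nat) : Int), (j : Int)) ∈ pvScanB m n g := by
  obtain ⟨hjN, hb0, hb1⟩ := inHit_bounds hhit
  have hle0 := Fcol_le hg hsor (show j < N by omega)
  have htM : t + 1 < M := by omega
  have hteq : M - 2 - (M - 2 - t) = t := by omega
  have hcond := (corner_iff hg hsor (show (M - 2 - t) + 1 < M by omega) hjN).mpr
    (by rw [hteq]; exact hhit)
  refine mem_scanB_iff.mpr ⟨by omega, by omega, by omega, by omega, ?_⟩
  simpa using hcond

theorem doomedP_iff {m n : Int} {M N : Nat} (hM : M = m.toNat) (hN : N = n.toNat)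
    (hm : 1 ≤ m) (hn : 1 ≤ n) {g : List (List Char)} (hg : g.length = M)
    (hsor : pvSortedG M N g) {i j : Nat} (hi : i < M) (hj : j < N) :
    (pvDoomed (pvScanB m n g)).contains ((i : Int), (j : Int)) = true ↔
      pvDeadP (pvStacks N g) j (M - 1 - i) := by
  rw [doomed_mem]
  constructor
  · rintro ⟨c, hc, hx, hy⟩
    have hc' : (c.1, c.2) ∈ pvScanB m n g := by
      rw [Prod.mk.eta]
      exact hc
    obtain ⟨hx0, hx1, hy0, hy1, hcond⟩ := mem_scanB_iff.mp hc'
    have hhit := (corner_iff hg hsor (show c.1.toNat + 1 < M by omega)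
      (show c.2.toNat + 1 < N by omega)).mp hcond
    refine ⟨c.2.toNat, M - 2 - c.1.toNat, hhit, by omega, ?_⟩
    obtain ⟨-, hb0, -⟩ := inHit_bounds hhit
    have hle0 := Fcol_le hg hsor (show c.2.toNat < N by omega)
    rcases hx with hx | hx
    · right; omega
    · left; omega
  · rintro ⟨j', t', hhit, hjj, htt⟩
    obtain ⟨hjN', hb0, hb1⟩ := inHit_bounds hhit
    have hle0 := Fcol_le hg hsor (show j' < N by omega)
    have hmem := hit_corner_mem hM hN hm hg hsor hhit
    refine ⟨(((M - 2 - t' : Nat) : Int), (j' : Int)), hmem, ?_, by omega⟩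
    rcases htt with htt | htt
    · right; omega
    · left; omega

-- ===== column decomposition of the grid rebuild =====

def pvKeep (m : Int) (g : List (List Char)) (hits : List (Int × Int)) (j : Int) : List Char :=
  (PySem.List.pyRange 0 m 1).filterMap (fun i =>
    if ¬ (pvDoomed hits).contains (i, j) ∧ pvCell g i.toNat j.toNat ≠ '-' then
      some (pvCell g i.toNat j.toNat) else none)

theorem getD_map_pyRange0 {α : Type} (f : Int → α) (n : Int) {j : Nat} (hj : j < n.toNat)
    (d : α) : ((PySem.List.pyRange 0 n 1).map f).getD j d = f ((j : Nat) : Int) := by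
  rw [hpr, List.map_map, List.getD_eq_getElem?_getD, List.getElem?_map, List.getElem?_range hj]
  rfl

theorem colsB_getD (m n : Int) (g : List (List Char)) (hits : List (Int × Int)) {j : Nat}
    (hj : j < n.toNat) :
    (pvColsB m n g hits).getD j [] =
      List.replicate ((m - ((pvKeep m g hits ((j : Nat) : Int)).length : Int)).toNat) '-' ++
        pvKeep m g hits ((j : Nat) : Int) := by
  unfold pvColsB pvKeep pvDoomed
  exact getD_map_pyRange0 _ n hj []

theorem keep_len_le (m : Int) (g : List (List Char)) (hits : List (Int × Int)) (j : Int) :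
    (pvKeep m g hits j).length ≤ m.toNat := by
  unfold pvKeep
  refine le_trans (List.length_filterMap_le _ _) ?_
  rw [PySem.List.length_pyRange_one]
  omega

theorem keep_eq_fIdx {m n : Int} {M N : Nat} (hM : M = m.toNat) (hN : N = n.toNat)
    (hm : 1 ≤ m) (hn : 1 ≤ n) {g : List (List Char)} (hg : g.length = M)
    (hr : ∀ r ∈ g, r.length = N) (hsor : pvSortedG M N g) {j : Nat} (hj : j < N) :
    pvKeep m g (pvScanB m n g) ((j : Nat) : Int) =
      fIdx (pvFcol g j) (fun s => ¬ ((pvFcol g j).length - 1 - s) ∈ pvDJ n g j) := by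
  subst hN
  have hle0 := Fcol_le hg hsor hj
  obtain ⟨-, -, hdm⟩ := pvDead_spec n (pvStacks n.toNat g) (by rw [length_stacks])
  unfold pvKeep
  rw [hpr m, List.filterMap_map, ← hM]
  rw [show M = (M - (pvFcol g j).length) + (pvFcol g j).length by omega, List.range_add,
    List.filterMap_append, List.filterMap_map]
  have hpart1 : (List.range (M - (pvFcol g j).length)).filterMap
      ((fun i : Int => if ¬ (pvDoomed (pvScanB m n g)).contains (i, ((j : Nat) : Int)) ∧
          pvCell g i.toNat (Int.toNat ((j : Nat) : Int)) ≠ '-' then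
          some (pvCell g i.toNat (Int.toNat ((j : Nat) : Int))) else none) ∘
        (fun k => Int.ofNat k)) = [] := by
    rw [List.filterMap_eq_nil_iff]
    intro i hi
    rw [List.mem_range] at hi
    have hdash : pvCell g i j = '-' :=
      (cell_dash_iff hg hsor hj (by omega)).mpr (by omega)
    simp only [Function.comp_def, toNat_ofNat', Int.toNat_natCast]
    rw [if_neg (fun hcon => hcon.2 hdash)]
  rw [hpart1, List.nil_append]
  unfold fIdx
  apply List.filterMap_congr
  intro s hs
  rw [List.mem_range] at hs
  simp only [Function.comp_def, toNat_ofNat', Int.toNat_natCast]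
  have hcellF : pvCell g (M - (pvFcol g j).length + s) j = (pvFcol g j).getD s ' ' := by
    rw [cell_of_sorted hg hsor hj (by omega), if_neg (by omega)]
    congr 1
    omega
  have hne : pvCell g (M - (pvFcol g j).length + s) j ≠ '-' := by
    rw [hcellF]
    exact Fget_ne hs
  have hidx : M - 1 - (M - (pvFcol g j).length + s) = (pvFcol g j).length - 1 - s := by omega
  have hdoom : (pvDoomed (pvScanB m n g)).contains
      (((M - (pvFcol g j).length + s : Nat) : Int), ((j : Nat) : Int)) = true ↔
      ((pvFcol g j).length - 1 - s) ∈ pvDJ n g j := by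
    rw [doomedP_iff hM rfl hm hn hg hsor (by omega) hj, hidx]
    unfold pvDJ
    exact (hdm j ((pvFcol g j).length - 1 - s)).symm
  by_cases hd : ((pvFcol g j).length - 1 - s) ∈ pvDJ n g j
  · rw [if_neg (fun hcon => hcon.1 (hdoom.mpr hd)), if_neg (not_not_intro hd)]
  · rw [if_pos ⟨fun hcon => hd (hdoom.mp hcon), hne⟩, if_pos hd, hcellF]

theorem map_getD_self : ∀ l : List Char,
    (List.range l.length).map (fun i => l.getD i ' ') = l := by
  intro l
  apply List.ext_getElem
  · simp
  · intro i h1 h2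
    simp only [List.getElem_map, List.getElem_range]
    rw [List.getD_eq_getElem?_getD, List.getElem?_eq_getElem h2]
    rfl

theorem colsB_len {m n : Int} (hm : 1 ≤ m) (g : List (List Char)) (hits : List (Int × Int))
    {j : Nat} (hj : j < n.toNat) :
    ((pvColsB m n g hits).getD j []).length = m.toNat := by
  rw [colsB_getD m n g hits hj, List.length_append, List.length_replicate]
  have := keep_len_le m g hits ((j : Nat) : Int)
  omega

theorem colOf_gridB {m n : Int} (hm : 1 ≤ m) (g : List (List Char))
    (hits : List (Int × Int)) {j : Nat} (hj : j < n.toNat) :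
    pvColOf (pvGridB m n g hits) j = (pvColsB m n g hits).getD j [] := by
  rw [gridB_decomp]
  unfold pvColOf
  rw [List.map_map]
  have hrow : ∀ i : Int, ((PySem.List.pyRange 0 n 1).map (fun j' =>
      ((pvColsB m n g hits).getD j'.toNat []).getD i.toNat ' ')).getD j ' ' =
      ((pvColsB m n g hits).getD j []).getD i.toNat ' ' := by
    intro i
    rw [getD_map_pyRange0 _ n hj, Int.toNat_natCast]
  have hfun : ((fun row : List Char => row.getD j ' ') ∘ (fun i : Int =>
      (PySem.List.pyRange 0 n 1).map (fun j' =>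
        ((pvColsB m n g hits).getD j'.toNat []).getD i.toNat ' '))) =
      fun i : Int => ((pvColsB m n g hits).getD j []).getD i.toNat ' ' := by
    funext i
    exact hrow i
  rw [hfun, hpr m, List.map_map]
  have hfun2 : ((fun i : Int => ((pvColsB m n g hits).getD j []).getD i.toNat ' ') ∘
      (fun k : Nat => Int.ofNat k)) =
      fun k : Nat => ((pvColsB m n g hits).getD j []).getD k ' ' := by
    funext k
    rfl
  rw [hfun2, show m.toNat = ((pvColsB m n g hits).getD j []).length from
    (colsB_len hm g hits hj).symm, map_getD_self]

theorem filter_replicate_dash (k : Nat) :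
    (List.replicate k '-').filter (fun c => c != '-') = [] := by
  induction k with
  | zero => rfl
  | succ k ih => simpa [List.replicate_succ, List.filter_cons] using ih

theorem Fcol_gridB {m n : Int} {M N : Nat} (hM : M = m.toNat) (hN : N = n.toNat)
    (hm : 1 ≤ m) (hn : 1 ≤ n) {g : List (List Char)} (hg : g.length = M)
    (hr : ∀ r ∈ g, r.length = N) (hsor : pvSortedG M N g) {j : Nat} (hj : j < N) :
    pvFcol (pvGridB m n g (pvScanB m n g)) j = pvKeep m g (pvScanB m n g) ((j : Nat) : Int) := by
  unfold pvFcol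
  rw [colOf_gridB hm g _ (by omega), colsB_getD m n g _ (by omega), List.filter_append,
    filter_replicate_dash, List.nil_append]
  apply List.filter_eq_self.mpr
  intro c hc
  rw [keep_eq_fIdx hM hN hm hn hg hr hsor hj] at hc
  obtain ⟨s, hs, rfl⟩ := mem_fIdx hc
  simpa using Fget_ne hs

theorem sorted_gridB {m n : Int} {M N : Nat} (hM : M = m.toNat) (hN : N = n.toNat)
    (hm : 1 ≤ m) (hn : 1 ≤ n) {g : List (List Char)} (hg : g.length = M)
    (hr : ∀ r ∈ g, r.length = N) (hsor : pvSortedG M N g) :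
    pvSortedG M N (pvGridB m n g (pvScanB m n g)) := by
  intro j hj
  rw [colOf_gridB hm g _ (by omega), colsB_getD m n g _ (by omega),
    Fcol_gridB hM hN hm hn hg hr hsor hj]
  have hkl := keep_len_le m g (pvScanB m n g) ((j : Nat) : Int)
  rw [show (m - ((pvKeep m g (pvScanB m n g) ((j : Nat) : Int)).length : Int)).toNat =
    M - (pvKeep m g (pvScanB m n g) ((j : Nat) : Int)).length by omega]

theorem stk_gridB {m n : Int} {M N : Nat} (hM : M = m.toNat) (hN : N = n.toNat)
    (hm : 1 ≤ m) (hn : 1 ≤ n) {g : List (List Char)} (hg : g.length = M)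
    (hr : ∀ r ∈ g, r.length = N) (hsor : pvSortedG M N g) {j : Nat} (hj : j < N) :
    pvStk (pvGridB m n g (pvScanB m n g)) j =
      fIdx (pvStk g j) (fun t => ¬ t ∈ pvDJ n g j) := by
  unfold pvStk
  rw [Fcol_gridB hM hN hm hn hg hr hsor hj, keep_eq_fIdx hM hN hm hn hg hr hsor hj, fIdx_rev]
  apply fIdx_congr
  intro t ht
  rw [List.length_reverse] at ht
  rw [show (pvFcol g j).length - 1 - ((pvFcol g j).length - 1 - t) = t by omega]

-- ===== counting =====

theorem sum_map_getD {α : Type} (d : α) (f : α → Nat) :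
    ∀ l : List α, (l.map f).sum =
      ((List.range l.length).map (fun j => f (l.getD j d))).sum := by
  intro l
  induction l with
  | nil => rfl
  | cons a l ih =>
    rw [List.map_cons, List.sum_cons, List.length_cons, List.range_succ_eq_map,
      List.map_cons, List.sum_cons, List.map_map]
    have h2 : (List.map ((fun j => f ((a :: l).getD j d)) ∘ Nat.succ) (List.range l.length)).sum =
        (l.map f).sum := by
      simp only [Function.comp_def, List.getD_cons_succ]
      exact ih.symm
    rw [h2, List.getD_cons_zero]

theorem sum_int_map {α : Type} (f : α → Nat) :
    ∀ l : List α, (l.map (fun d => ((f d : Nat) : Int))).sum = (((l.map f).sum : Nat) : Int) := by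
  intro l
  induction l with
  | nil => rfl
  | cons a l ih =>
    rw [List.map_cons, List.sum_cons, ih, List.map_cons, List.sum_cons]
    push_cast
    ring

theorem filter_not_length {α : Type} (p : α → Bool) :
    ∀ l : List α, (l.filter (fun x => !(p x))).length + (l.filter p).length = l.length := by
  intro l
  induction l with
  | nil => rfl
  | cons a l ih =>
    by_cases h : p a = true
    · simp only [List.filter_cons, h, Bool.not_true, Bool.false_eq_true, if_false, if_true,
        List.length_cons]
      omega
    · rw [Bool.not_eq_true] at h
      simp only [List.filter_cons, h, Bool.not_false, Bool.false_eq_true, if_false, if_true,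
        List.length_cons]
      omega

theorem perm_mapRev (h : Nat) :
    ((List.range h).map (fun s => h - 1 - s)).Perm (List.range h) := by
  rw [List.perm_ext_iff_of_nodup _ (List.nodup_range)]
  · intro x
    rw [List.mem_map]
    constructor
    · rintro ⟨s, hs, rfl⟩
      rw [List.mem_range] at hs
      rw [List.mem_range]
      omega
    · intro hx
      rw [List.mem_range] at hx
      exact ⟨h - 1 - x, by rw [List.mem_range]; omega, by omega⟩
  · refine List.Nodup.map_on ?_ List.nodup_range
    intro x hx y hy hxy
    rw [List.mem_range] at hx hy
    omega

theorem lenfilter_rev (h : Nat) (p : Nat → Bool) :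
    ((List.range h).filter (fun s => p (h - 1 - s))).length =
      ((List.range h).filter p).length := by
  have h1 : ((List.range h).map (fun s => h - 1 - s)).filter p =
      ((List.range h).filter (p ∘ (fun s => h - 1 - s))).map (fun s => h - 1 - s) :=
    List.filter_map
  have h2 := ((perm_mapRev h).filter p).length_eq
  rw [h1, List.length_map] at h2
  rw [← h2]
  rfl

theorem DJ_nodup (n : Int) (g : List (List Char)) (j : Nat) : (pvDJ n g j).Nodup := by
  obtain ⟨hlen, hnd, -⟩ := pvDead_spec n (pvStacks n.toNat g) (by rw [length_stacks])
  unfold pvDJ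
  rcases Nat.lt_or_ge j (pvDead n (pvStacks n.toNat g)).length with hj | hj
  · rw [List.getD_eq_getElem?_getD, List.getElem?_eq_getElem hj]
    exact hnd _ (List.getElem_mem hj)
  · rw [List.getD_eq_getElem?_getD, List.getElem?_eq_none (by omega)]
    exact List.nodup_nil

theorem DJ_bound {n : Int} {g : List (List Char)} {j t : Nat} (h : t ∈ pvDJ n g j) :
    t < (pvFcol g j).length := by
  obtain ⟨-, -, hdm⟩ := pvDead_spec n (pvStacks n.toNat g) (by rw [length_stacks])
  have hP := (hdm j t).mp h
  obtain ⟨j', t', hhit, hjj, htt⟩ := hP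
  obtain ⟨hjN, hb0, hb1⟩ := inHit_bounds hhit
  rcases hjj with rfl | rfl
  · omega
  · omega

theorem DJ_len_filter (n : Int) (g : List (List Char)) (j : Nat) :
    ((List.range (pvFcol g j).length).filter (fun t => decide (t ∈ pvDJ n g j))).length =
      (pvDJ n g j).length := by
  have hperm : ((List.range (pvFcol g j).length).filter
      (fun t => decide (t ∈ pvDJ n g j))).Perm (pvDJ n g j) := by
    rw [List.perm_ext_iff_of_nodup (List.Nodup.filter _ List.nodup_range) (DJ_nodup n g j)]
    intro x
    rw [List.mem_filter, List.mem_range]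
    constructor
    · rintro ⟨-, hx⟩
      simpa using hx
    · intro hx
      exact ⟨DJ_bound hx, by simpa using hx⟩
  exact hperm.length_eq

theorem keep_len {m n : Int} {M N : Nat} (hM : M = m.toNat) (hN : N = n.toNat)
    (hm : 1 ≤ m) (hn : 1 ≤ n) {g : List (List Char)} (hg : g.length = M)
    (hr : ∀ r ∈ g, r.length = N) (hsor : pvSortedG M N g) {j : Nat} (hj : j < N) :
    (pvKeep m g (pvScanB m n g) ((j : Nat) : Int)).length =
      (pvFcol g j).length - (pvDJ n g j).length := by
  rw [keep_eq_fIdx hM hN hm hn hg hr hsor hj, length_fIdx]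
  have hd : (fun s => decide (¬ ((pvFcol g j).length - 1 - s) ∈ pvDJ n g j)) =
      (fun s => !(decide (((pvFcol g j).length - 1 - s) ∈ pvDJ n g j))) := by
    funext s
    simp
  rw [hd]
  have h1 := filter_not_length (fun s => decide (((pvFcol g j).length - 1 - s) ∈ pvDJ n g j))
    (List.range (pvFcol g j).length)
  have h2 : ((List.range (pvFcol g j).length).filter
      (fun s => decide (((pvFcol g j).length - 1 - s) ∈ pvDJ n g j))).length =
      (pvDJ n g j).length := by
    rw [lenfilter_rev (pvFcol g j).length (fun t => decide (t ∈ pvDJ n g j))]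
    exact DJ_len_filter n g j
  simp only [] at h1
  rw [List.length_range] at h1
  omega

theorem DC_le (n : Int) (g : List (List Char)) (j : Nat) :
    (pvDJ n g j).length ≤ (pvFcol g j).length := by
  rw [← DJ_len_filter n g j]
  exact le_trans (List.length_filter_le _ _) (by rw [List.length_range])

theorem k_port_eq {n : Int} {N : Nat} (hN : N = n.toNat) (g : List (List Char)) :
    ((pvDead n (pvStacks n.toNat g)).map (fun d => ((d : List Nat).length : Int))).sum =
      ((((List.range N).map (fun j => (pvDJ n g j).length)).sum : Nat) : Int) := by
  subst hN
  obtain ⟨hlen, -, -⟩ := pvDead_spec n (pvStacks n.toNat g) (by rw [length_stacks])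
  rw [sum_int_map (fun d : PySem.Set Nat => (d : List Nat).length)]
  congr 1
  rw [sum_map_getD PySem.Set.empty List.length, hlen]
  rfl

theorem dash_gridB {m n : Int} {M N : Nat} (hM : M = m.toNat) (hN : N = n.toNat)
    (hm : 1 ≤ m) (hn : 1 ≤ n) {g : List (List Char)} (hg : g.length = M)
    (hr : ∀ r ∈ g, r.length = N) (hsor : pvSortedG M N g) :
    pvDashN N (pvGridB m n g (pvScanB m n g)) =
      pvDashN N g + ((List.range N).map (fun j => (pvDJ n g j).length)).sum := by
  obtain ⟨hgl, -⟩ := gridB_rect (m := m) (n := n) (by omega) (by omega) g (pvScanB m n g)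
  have hsor' := sorted_gridB hM hN hm hn hg hr hsor
  unfold pvDashN
  have hstep : ((List.range N).map (fun j =>
      (pvColOf (pvGridB m n g (pvScanB m n g)) j).count '-')).sum =
      ((List.range N).map (fun j =>
        ((pvColOf g j).count '-') + (pvDJ n g j).length)).sum := by
    congr 1
    apply List.map_congr_left
    intro j hj
    rw [List.mem_range] at hj
    rw [dash_count_of_sorted (hM ▸ hgl) hsor' hj,
      Fcol_gridB hM hN hm hn hg hr hsor hj, keep_len hM hN hm hn hg hr hsor hj,
      dash_count_of_sorted hg hsor hj]
    have h1 := Fcol_le hg hsor hj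
    have h2 := DC_le n g j
    omega
  rw [hstep, sum_map_add_nat]

theorem scan_empty_iff_DC {m n : Int} {M N : Nat} (hM : M = m.toNat) (hN : N = n.toNat)
    (hm : 1 ≤ m) (hn : 1 ≤ n) {g : List (List Char)} (hg : g.length = M)
    (hsor : pvSortedG M N g) :
    (pvScanB m n g = [] ↔ ((List.range N).map (fun j => (pvDJ n g j).length)).sum = 0) := by
  obtain ⟨-, -, hdm⟩ := pvDead_spec n (pvStacks n.toNat g) (by rw [length_stacks])
  rw [scanB_empty_iff hM hN hm hn hg hsor]
  constructor
  · intro hall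
    apply List.sum_eq_zero
    intro x hx
    rcases List.mem_map.mp hx with ⟨j, hjm, rfl⟩
    rw [List.length_eq_zero_iff, List.eq_nil_iff_forall_not_mem]
    intro t ht
    obtain ⟨j', t', hhit, -, -⟩ := (hdm j t).mp ht
    exact hall j' t' (by rw [hN]; exact hhit)
  · intro hsum j t hhit
    have hjN : j + 1 < N := by
      have := hhit.1
      rw [length_stacks] at this
      exact this
    have hP : pvDeadP (pvStacks n.toNat g) j t :=
      ⟨j, t, by rw [← hN]; exact hhit, Or.inl rfl, Or.inl rfl⟩
    have hmem : t ∈ pvDJ n g j := (hdm j t).mpr hP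
    have hx : (pvDJ n g j).length ∈ (List.range N).map (fun j => (pvDJ n g j).length) :=
      List.mem_map.mpr ⟨j, List.mem_range.mpr (by omega), rfl⟩
    have hz : (pvDJ n g j).length = 0 := by
      by_contra hnz
      have hpos : 0 < (pvDJ n g j).length := Nat.pos_of_ne_zero hnz
      have hle := List.single_le_sum (fun x _ => Nat.zero_le x) _ hx
      omega
    rw [List.length_eq_zero_iff] at hz
    rw [hz] at hmem
    exact List.not_mem_nil hmem

theorem getElem_stacks (N : Nat) (g : List (List Char)) (j : Nat)
    (h : j < (pvStacks N g).length) : (pvStacks N g)[j] = pvStk g j := by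
  simp [pvStacks]

theorem stacks_gridB {m n : Int} {M N : Nat} (hM : M = m.toNat) (hN : N = n.toNat)
    (hm : 1 ≤ m) (hn : 1 ≤ n) {g : List (List Char)} (hg : g.length = M)
    (hr : ∀ r ∈ g, r.length = N) (hsor : pvSortedG M N g) :
    pvStacks N (pvGridB m n g (pvScanB m n g)) =
      (PySem.List.enumerate (pvStacks n.toNat g)).map (fun jc =>
        (PySem.List.enumerate jc.2).filterMap (fun tc =>
          if ((pvDead n (pvStacks n.toNat g)).getD jc.1.toNat PySem.Set.empty).contains
            tc.1.toNat then none
          else some tc.2)) := by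
  subst hN
  apply List.ext_getElem
  · rw [length_stacks, List.length_map, PySem.List.length_enumerate, length_stacks]
  · intro j h1 h2
    rw [length_stacks] at h1
    rw [List.getElem_map, PySem.List.getElem_enumerate, getElem_stacks, getElem_stacks,
      stk_gridB hM rfl hm hn hg hr hsor h1]
    have htoN : ((0 : Int) + (j : Int)).toNat = j := by omega
    rw [htoN]
    have := enum_filterMap ((pvDead n (pvStacks n.toNat g)).getD j PySem.Set.empty)
      (pvStk g j) 0
    rw [show ((0 : Nat) : Int) = (0 : Int) from rfl] at this
    rw [this]
    apply fIdx_congr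
    intro t _
    unfold pvDJ
    rw [Nat.zero_add]

-- master induction: on sorted rectangular grids the grid loop equals the stack loop
theorem loops_eq2 {m n : Int} (hm : 1 ≤ m) (hn : 1 ≤ n) :
    ∀ (f : Nat) (g : List (List Char)), g.length = m.toNat → (∀ r ∈ g, r.length = n.toNat) →
      pvSortedG m.toNat n.toNat g →
      pvLoopG m n f g = pvLoopN n f (pvStacks n.toNat g) ((pvDashN n.toNat g : Nat) : Int) := by
  intro f
  induction f with
  | zero => intro g _ _ _; rfl
  | succ f ih =>
    intro g hg hr hsor
    rw [pvLoopG_succ, pvLoopN_succ]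
    have hk := k_port_eq (n := n) (N := n.toNat) rfl g
    by_cases hemp : pvScanB m n g = []
    · have hDC := (scan_empty_iff_DC rfl rfl hm hn hg hsor).mp hemp
      rw [hemp, hk, hDC]
      rw [if_pos (show (([] : List (Int × Int)).isEmpty = true) from rfl)]
      rw [if_pos (show ((((0 : Nat) : Int)) == 0) = true by decide)]
      rw [sum_int_map (fun row : List Char => row.count '-') g, rowdash_eq_coldash hr]
    · have hDC : ((List.range n.toNat).map (fun j => (pvDJ n g j).length)).sum ≠ 0 :=
        fun h => hemp ((scan_empty_iff_DC rfl rfl hm hn hg hsor).mpr h)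
      have hkne : ¬ ((((pvDead n (pvStacks n.toNat g)).map
          (fun d => ((d : List Nat).length : Int))).sum == 0) = true) := by
        rw [hk]
        simp only [beq_iff_eq, Int.natCast_eq_zero]
        exact hDC
      rw [if_neg (by simpa using hemp), if_neg hkne]
      obtain ⟨hgl, hgr⟩ := gridB_rect (m := m) (n := n) (by omega) (by omega) g (pvScanB m n g)
      have := ih (pvGridB m n g (pvScanB m n g)) hgl hgr
        (sorted_gridB rfl rfl hm hn hg hr hsor)
      rw [this, stacks_gridB rfl rfl hm hn hg hr hsor,
        dash_gridB rfl rfl hm hn hg hr hsor, hk]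
      push_cast
      ring

theorem sortedCol_decomp :
    ∀ l : List Char, (∀ i i' : Nat, i < i' → i' < l.length →
        l.getD i' ' ' = '-' → l.getD i ' ' = '-') →
      l = List.replicate (l.length - (l.filter (fun c => c != '-')).length) '-' ++
        l.filter (fun c => c != '-') := by
  intro l
  induction l with
  | nil => intro _; rfl
  | cons a l ih =>
    intro H
    have Hl : ∀ i i' : Nat, i < i' → i' < l.length → l.getD i' ' ' = '-' →
        l.getD i ' ' = '-' := by
      intro i i' h1 h2 h3
      have := H (i+1) (i'+1) (by omega) (by rw [List.length_cons]; omega)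
        (by rw [List.getD_cons_succ]; exact h3)
      rw [List.getD_cons_succ] at this
      exact this
    by_cases ha : a = '-'
    · subst ha
      have hflt : (('-' : Char) :: l).filter (fun c => c != '-') =
          l.filter (fun c => c != '-') := by
        rw [List.filter_cons]
        simp
      have hlen := List.length_filter_le (fun c => c != '-') l
      rw [hflt, show (('-' : Char) :: l).length - (l.filter (fun c => c != '-')).length =
        (l.length - (l.filter (fun c => c != '-')).length) + 1 by
          rw [List.length_cons]; omega,
        List.replicate_succ, List.cons_append]
      exact congrArg _ (ih Hl)
    · have hnod : ∀ i' : Nat, i' < l.length → l.getD i' ' ' ≠ '-' := by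
        intro i' h2 h3
        have := H 0 (i'+1) (by omega) (by rw [List.length_cons]; omega)
          (by rw [List.getD_cons_succ]; exact h3)
        rw [List.getD_cons_zero] at this
        exact ha this
      have hfl : (a :: l).filter (fun c => c != '-') = a :: l := by
        apply List.filter_eq_self.mpr
        intro c hc
        rw [List.mem_cons] at hc
        rcases hc with rfl | hc
        · simpa using ha
        · obtain ⟨k, hk, rfl⟩ := List.getElem_of_mem hc
          have := hnod k hk
          rw [List.getD_eq_getElem?_getD, List.getElem?_eq_getElem hk] at this
          simpa using this
      rw [hfl, Nat.sub_self, List.replicate_zero, List.nil_append]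

def pvFcol_aux (l : List Char) : List Char := l.filter (fun c => c != '-')

theorem filter_getD_map_ne :
    ∀ l : List Char,
      ((List.range l.length).filter (fun k => decide (l.getD k ' ' ≠ '-'))).map
        (fun k => l.getD k ' ') = pvFcol_aux l := by
  intro l
  induction l with
  | nil => rfl
  | cons a l ih =>
    rw [List.length_cons, List.range_succ_eq_map, List.filter_cons]
    have htail : (((List.range l.length).map Nat.succ).filter
        (fun k => decide ((a :: l).getD k ' ' ≠ '-'))).map (fun k => (a :: l).getD k ' ') =
        pvFcol_aux l := by
      rw [List.filter_map, List.map_map]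
      have h1 : ((fun k => decide ((a :: l).getD k ' ' ≠ '-')) ∘ Nat.succ) =
          (fun k => decide (l.getD k ' ' ≠ '-')) := by
        funext k
        simp only [Function.comp_def, List.getD_cons_succ]
      have h2 : ((fun k => (a :: l).getD k ' ') ∘ Nat.succ) = (fun k => l.getD k ' ') := by
        funext k
        simp only [Function.comp_def, List.getD_cons_succ]
      rw [h1, h2, ih]
    by_cases ha : a = '-'
    · rw [if_neg (by simp [List.getD_cons_zero, ha]), htail]
      unfold pvFcol_aux
      rw [List.filter_cons, if_neg (by simp [ha])]
    · rw [if_pos (by simp [List.getD_cons_zero, ha]), List.map_cons, List.getD_cons_zero, htail]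
      unfold pvFcol_aux
      rw [List.filter_cons, if_pos (by simp [ha])]

-- ===== VERDICT (by name: the statement is the Claim_ definition above) =====
theorem solution_spec : Claim_equal_solution := by
  intro m n board _ hpre
  unfold Spec_solution solution solution_alt
  show pvLoopA m n (((board.map (fun b => b.toList)).map List.length).sum + 1)
      (board.map (fun b => b.toList)) =
    (if m ≤ 0 ∨ n ≤ 0 then (board.map (fun r => (r.toList.count '-' : Int))).sum
     else pvLoopN n ((board.map (fun s => s.toList.length)).sum + 1)
      ((PySem.List.pyRange 0 n 1).map (fun j =>
        (PySem.List.pyRange (m-1) (-1) (-1)).filterMap (fun i =>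
          if ((board.getD i.toNat "").toList).getD j.toNat ' ' ≠ '-' then
            some (((board.getD i.toNat "").toList).getD j.toNat ' ') else none)))
      ((board.map (fun r => (r.toList.count '-' : Int))).sum))
  have hfuel : (board.map (fun b => b.toList)).map List.length =
      board.map (fun s => s.toList.length) := by
    rw [List.map_map]
    rfl
  have hrm : (board.map (fun r => (r.toList.count '-' : Int))).sum =
      ((board.map (fun b => b.toList)).map (fun row => (row.count '-' : Int))).sum := by
    rw [List.map_map]
    rfl
  have hbg : ∀ k : Nat, (board.getD k "").toList =
      (board.map (fun b => b.toList)).getD k [] := by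
    intro k
    rcases Nat.lt_or_ge k board.length with hk | hk
    · rw [List.getD_eq_getElem?_getD, List.getElem?_eq_getElem hk,
        List.getD_eq_getElem?_getD, List.getElem?_eq_getElem (by simpa using hk)]
      simp
    · rw [List.getD_eq_getElem?_getD, List.getElem?_eq_none (by omega),
        List.getD_eq_getElem?_getD, List.getElem?_eq_none (by simpa using hk)]
      rfl
  by_cases hmn : m ≤ 0 ∨ n ≤ 0
  · -- degenerate sizes: A counts '-' over the whole board, B returns its seeded counter
    have hA0 : pvLoopA m n (((board.map (fun b => b.toList)).map List.length).sum + 1)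
        (board.map (fun b => b.toList)) =
        ((board.map (fun b => b.toList)).map (fun row => (row.count '-' : Int))).sum := by
      rw [loops_eq m n _ _ (by rcases hmn with h | h; exacts [Or.inl h, Or.inr (Or.inl h)]),
        pvLoopG_succ]
      have hSB : pvScanB m n (board.map (fun b => b.toList)) = [] := by
        unfold pvScanB
        rcases hmn with h | h
        · rw [PySem.List.pyRange_one_eq_nil (by omega : m - 1 ≤ 0)]
          rfl
        · rw [List.flatMap_eq_nil_iff]
          intro i _
          rw [PySem.List.pyRange_one_eq_nil (by omega : n - 1 ≤ 0)]
          rfl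
      rw [hSB, if_pos (show (([] : List (Int × Int)).isEmpty = true) from rfl)]
    rw [hA0, hrm, if_pos hmn]
  · rw [if_neg hmn]
    push_neg at hmn
    obtain ⟨hm0, hn0⟩ := hmn
    have hm : 1 ≤ m := by omega
    have hn : 1 ≤ n := by omega
    rcases hpre with h | h | ⟨hlen, hrows, hsortp⟩
    · omega
    · omega
    have hg0 : (board.map (fun b => b.toList)).length = m.toNat := by
      rw [List.length_map]
      omega
    have hr0 : ∀ r ∈ board.map (fun b => b.toList), r.length = n.toNat := by
      intro r hr
      rw [List.mem_map] at hr
      obtain ⟨s, hs, rfl⟩ := hr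
      have := hrows s hs
      omega
    have hcell : ∀ (i j : Nat), (pvColOf (board.map (fun b => b.toList)) j).getD i ' ' =
        ((board.getD i "").toList).getD j ' ' := by
      intro i j
      rcases Nat.lt_or_ge i (board.map (fun b => b.toList)).length with hi | hi
      · rw [← cell_colOf _ j hi]
        unfold pvCell
        rw [hbg i]
      · rw [List.getD_eq_getElem?_getD, List.getElem?_eq_none (by rw [length_colOf]; omega),
          hbg i, List.getD_eq_getElem?_getD (l := (board.map (fun b => b.toList)).getD i []),
          show (board.map (fun b => b.toList)).getD i [] = [] by
            rw [List.getD_eq_getElem?_getD, List.getElem?_eq_none (by omega)]; rfl]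
        rfl
    have hrowlen : ∀ i : Nat, i < board.length →
        ((board.getD i "").toList).length = n.toNat := by
      intro i hi
      rw [List.getD_eq_getElem?_getD, List.getElem?_eq_getElem hi, Option.getD_some]
      have := hrows _ (List.getElem_mem hi)
      omega
    have hsor0 : pvSortedG m.toNat n.toNat (board.map (fun b => b.toList)) := by
      intro j hj
      have hdec := sortedCol_decomp (pvColOf (board.map (fun b => b.toList)) j) ?_
      · rw [length_colOf, hg0] at hdec
        exact hdec
      · intro i i' h1 h2 h3
        rw [length_colOf, hg0] at h2
        have hib : i' < board.length := by omega
        rw [hcell i' j] at h3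
        rw [hcell i j]
        exact hsortp i' hib i h1 j (by rw [hrowlen i' hib]; omega) h3
    have hstacks0 : (PySem.List.pyRange 0 n 1).map (fun j =>
        (PySem.List.pyRange (m-1) (-1) (-1)).filterMap (fun i =>
          if ((board.getD i.toNat "").toList).getD j.toNat ' ' ≠ '-' then
            some (((board.getD i.toNat "").toList).getD j.toNat ' ') else none)) =
        pvStacks n.toNat (board.map (fun b => b.toList)) := by
      apply List.ext_getElem
      · rw [List.length_map, PySem.List.length_pyRange_one, length_stacks]
        omega
      · intro j h1 h2
        rw [List.length_map, PySem.List.length_pyRange_one] at h1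
        rw [List.getElem_map, PySem.List.getElem_pyRange_one, getElem_stacks]
        rw [show (0 : Int) + (j : Int) = ((j : Nat) : Int) by omega]
        rw [PySem.List.pyRange_neg_one_eq_reverse, List.filterMap_reverse]
        rw [show (-1 + 1 : Int) = 0 by ring, show (m - 1 + 1 : Int) = m by ring]
        unfold pvStk
        congr 1
        rw [hpr m, List.filterMap_map]
        have hfn : ((fun i : Int =>
            if ((board.getD i.toNat "").toList).getD ((j : Nat) : Int).toNat ' ' ≠ '-' then
              some (((board.getD i.toNat "").toList).getD ((j : Nat) : Int).toNat ' ')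
            else none) ∘ (fun k : Nat => Int.ofNat k)) =
            fun k : Nat =>
              if (pvColOf (board.map (fun b => b.toList)) j).getD k ' ' ≠ '-' then
                some ((pvColOf (board.map (fun b => b.toList)) j).getD k ' ') else none := by
          funext k
          simp only [Function.comp_def, toNat_ofNat', Int.toNat_natCast]
          rw [hcell k j]
        rw [hfn, filterMap_ite (fun k => (pvColOf (board.map (fun b => b.toList)) j).getD k ' ')
          (fun k => (pvColOf (board.map (fun b => b.toList)) j).getD k ' ' ≠ '-')]
        rw [show m.toNat = (pvColOf (board.map (fun b => b.toList)) j).length by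
            rw [length_colOf, hg0]]
        rw [show pvFcol (board.map (fun b => b.toList)) j =
          pvFcol_aux (pvColOf (board.map (fun b => b.toList)) j) from rfl]
        exact filter_getD_map_ne (pvColOf (board.map (fun b => b.toList)) j)
    have hrm2 : (board.map (fun r => (r.toList.count '-' : Int))).sum =
        ((pvDashN n.toNat (board.map (fun b => b.toList)) : Nat) : Int) := by
      rw [hrm, sum_int_map (fun row : List Char => row.count '-'),
        rowdash_eq_coldash hr0]
    rw [loops_eq m n _ _ (Or.inr (Or.inr ⟨hm, hn, hg0, hr0⟩)),
      loops_eq2 hm hn _ _ hg0 hr0 hsor0, hstacks0, hrm2, hfuel]
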